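-- pv_equiv track=rewrite | github.com/rightthumb/rightthumb-widgets-v0 | widgets/python/_rightThumb/_hub/_string.py | stripNonAlphaNumaric
-- ===== SOURCE A (Python) =====
-- def stripNonAlphaNumaric( data, also='' ):
-- 	PERMITTED_CHARS = 'abcdefghijklmnopqrstuvwxyzABCDEFGHIJKLMNOPQRSTUVWXYZ0123456789' + also
-- 	data = str( data )
--
-- 	result = ''
-- 	for d in data:
-- 		if d in PERMITTED_CHARS:
-- 			result += d
-- 		else:
-- 			result += ' '
-- 	result = replaceDuplicate( result, ' ' )
-- 	result = cleanBE( result, ' ' )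
-- 	return result
--
-- def replaceAll(string,rWhat,rWith):
-- 	tmp = '{C9DCAA81-3B8A-68E9-E4CF-A405E2199CB9}'
--
--
-- 	done=False
-- 	string = str(string)
-- 	while done == False:
-- 		if string.count(str(rWhat)) > 0:
-- 			string = string.replace(str(rWhat),tmp)
-- 		else:
-- 			done=True
--
--
-- 	done=False
-- 	string = str(string)
-- 	while done == False:
-- 		if string.count(str(rWhat)) > 0:
-- 			string = string.replace(str(rWhat),tmp)
-- 		else:
-- 			done=True
--
--
--
-- 	done=False
-- 	while done == False:
-- 		if string.count(tmp) > 0: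
-- 			string = string.replace(tmp,str(rWith))
-- 		else:
-- 			done=True
--
-- 	string = string.replace(tmp,str(rWith))
-- 	return string
--
-- def replaceDuplicate(string,rWhat):
-- 	rWith = rWhat
-- 	rWhat = str(rWhat) + str(rWhat)
-- 	string = replaceAll(string,rWhat,rWith)
-- 	for x in range(10):
-- 		string = string.replace( rWhat, rWith )
-- 	return string
--
-- def cleanBE(string,rWhat):
-- 	string = cleanEnd(string,rWhat)
-- 	string = cleanFirst(string,rWhat)
-- 	return string
--
-- def cleanEnd(string,rWhat):
-- 	string = str(string)
-- 	rWhat = str(rWhat)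
-- 	# string = replaceDuplicate(string,rWhat)
-- 	string +=  '*?*'
-- 	string = string.replace(rWhat + '*?*', '')
-- 	string = string.replace('*?*', '')
-- 	if string.endswith(rWhat):
-- 		string = cleanEnd(string,rWhat)
--
-- 	return string
--
-- def cleanFirst(string,rWhat):
-- 	string = str(string)
-- 	rWhat = str(rWhat)
-- 	# string = replaceDuplicate(string,rWhat)
-- 	string = '*?*' + str(string)
-- 	string = string.replace('*?*' + rWhat, '')
-- 	string = string.replace('*?*', '')
-- 	if string.startswith(rWhat):
-- 		string = cleanFirst(string,rWhat)
-- 	return string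
-- ===== SOURCE B (Python) =====
-- def stripNonAlphaNumaric(data, also=''):
--     PERMITTED_CHARS = 'abcdefghijklmnopqrstuvwxyzABCDEFGHIJKLMNOPQRSTUVWXYZ0123456789' + also
--     words = []
--     cur = ''
--     for ch in str(data):
--         if ch in PERMITTED_CHARS and ch != ' ':
--             cur += ch
--         else:
--             if cur:
--                 words.append(cur)
--             cur = ''
--     if cur:
--         words.append(cur)
--     return ' '.join(words)
-- ===== Notes on version B (the rewrite author's own statement) =====
-- stated objective: simpler
-- what changed: Replaces A's pipeline (map non-permitted chars to spaces, sentinel-string based duplicate-space collapse with a bounded replace loop, recursive end/begin trims) by a single tokenizing pass that collects words and joins them with single spaces.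
-- intended difference: On inputs whose kept-character mask contains A's sentinel substrings ('{C9DCAA81-...-A405E2199CB9}' or '*?*'), ends with '*?', starts with the word '?*' followed by more content, or has an internal separator run longer than 2048 characters, A's sentinel replaces and its bounded collapse loop mangle the text (dropping or reordering characters, or leaving multiple spaces); B returns the straightforward words-joined-by-single-spaces value, which is the intended result. — e.g. on stripNonAlphaNumaric("a*?", "*?"): A returns "a?*", B returns "a*?"
import Mathlib
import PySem

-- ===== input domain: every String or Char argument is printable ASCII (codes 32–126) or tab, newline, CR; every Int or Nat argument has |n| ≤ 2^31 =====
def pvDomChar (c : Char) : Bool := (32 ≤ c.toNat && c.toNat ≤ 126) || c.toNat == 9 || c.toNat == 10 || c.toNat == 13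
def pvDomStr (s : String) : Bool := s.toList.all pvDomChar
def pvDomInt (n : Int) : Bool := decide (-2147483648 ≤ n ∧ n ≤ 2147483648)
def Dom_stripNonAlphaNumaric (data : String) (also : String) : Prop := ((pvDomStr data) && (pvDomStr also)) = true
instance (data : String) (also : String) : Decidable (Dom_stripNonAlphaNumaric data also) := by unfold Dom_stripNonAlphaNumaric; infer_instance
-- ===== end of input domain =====

-- B replaces A's pipeline (map non-permitted chars to spaces, sentinel-string duplicate-space collapse, recursive end/begin trims)
-- by a single tokenizing pass plus ' '.join; on the D_-inputs below A's sentinel tricks misfire and B returns the intended value.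

-- ===== PORT A =====
def pvBaseChars : List Char := "abcdefghijklmnopqrstuvwxyzABCDEFGHIJKLMNOPQRSTUVWXYZ0123456789".toList
def pvTmp : List Char := "{C9DCAA81-3B8A-68E9-E4CF-A405E2199CB9}".toList
def pvStar3 : List Char := ['*', '?', '*']

-- 'while done == False: if string.count(w) > 0: string = string.replace(w, n) else: done = True'
-- (fuel only bounds the iteration count; the Python loop terminates and the fuel passed below is always sufficient)
def pvWhileReplace : Nat → List Char → List Char → List Char → List Char
| 0, s, _, _ => s
| fuel+1, s, what, nu =>
    if 0 < PySem.Chars.count s what then pvWhileReplace fuel (PySem.Chars.replace s what nu) what nu else s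

def pvReplaceAll (s rWhat rWith : List Char) : List Char :=
  let tmp := pvTmp
  let s1 := pvWhileReplace (s.length + 2) s rWhat tmp
  let s2 := pvWhileReplace (s1.length + 2) s1 rWhat tmp
  let s3 := pvWhileReplace (s2.length + 2) s2 tmp rWith
  PySem.Chars.replace s3 tmp rWith

def pvReplaceDuplicate (s rWhat : List Char) : List Char :=
  let rWith := rWhat
  let rW2 := rWhat ++ rWhat
  let s1 := pvReplaceAll s rW2 rWith
  (PySem.List.pyRange 0 10 1).foldl (fun acc _ => PySem.Chars.replace acc rW2 rWith) s1

-- cleanEnd: Python recurses only after the string got strictly shorter, so the fuel passed below is always sufficient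
def pvCleanEnd : Nat → List Char → List Char → List Char
| 0, s, _ => s
| fuel+1, s, rWhat =>
    let s1 := s ++ pvStar3
    let s2 := PySem.Chars.replace s1 (rWhat ++ pvStar3) []
    let s3 := PySem.Chars.replace s2 pvStar3 []
    if PySem.Chars.endswith s3 rWhat then pvCleanEnd fuel s3 rWhat else s3

def pvCleanFirst : Nat → List Char → List Char → List Char
| 0, s, _ => s
| fuel+1, s, rWhat =>
    let s1 := pvStar3 ++ s
    let s2 := PySem.Chars.replace s1 (pvStar3 ++ rWhat) []
    let s3 := PySem.Chars.replace s2 pvStar3 []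
    if PySem.Chars.startswith s3 rWhat then pvCleanFirst fuel s3 rWhat else s3

def pvCleanBE (s rWhat : List Char) : List Char :=
  let s1 := pvCleanEnd (s.length + 1) s rWhat
  pvCleanFirst (s1.length + 1) s1 rWhat

-- 'result = ""; for d in data: result += d if d in PERMITTED_CHARS else " "' — the loop emits exactly
-- one character per input character, in order; the one-character membership test 'd in PERMITTED_CHARS'
-- is List.contains (exact for single characters)
def pvMaskA (data : String) (also : String) : List Char :=
  let P := pvBaseChars ++ also.toList
  data.toList.map (fun d => if P.contains d then d else ' ')

def stripNonAlphaNumaric (data : String) (also : String) : String :=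
  let res := pvMaskA data also
  let r1 := pvReplaceDuplicate res [' ']
  String.ofList (pvCleanBE r1 [' '])

-- ===== PORT B =====
def pvAltStep (P : List Char) (st : List (List Char) × List Char) (ch : Char) : List (List Char) × List Char :=
  if PySem.Chars.isIn [ch] P && ch != ' ' then (st.1, st.2 ++ [ch])
  else if st.2 ≠ [] then (st.1 ++ [st.2], []) else (st.1, [])

def stripNonAlphaNumaric_alt (data : String) (also : String) : String :=
  let P := pvBaseChars ++ also.toList
  let st := data.toList.foldl (pvAltStep P) ([], [])
  let ws := if st.2 ≠ [] then st.1 ++ [st.2] else st.1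
  String.ofList (PySem.Chars.join [' '] ws)

-- ===== PRECONDITION & SPEC =====
-- On inputs whose kept-character mask m (non-permitted or space characters mapped to ' ') contains A's sentinel
-- substrings '{C9DCAA81-…-A405E2199CB9}' or '*?*', ends with '*?', starts with the word '?*' followed by more
-- content, or whose trimmed mask t has a separator run longer than 2048, A's sentinel replaces and its bounded
-- collapse loop mangle the text; B returns the straightforward words-joined-by-single-spaces value, which is intended.
def pvRun : List Char := List.replicate 2049 ' '

def D_stripNonAlphaNumaric (data also : String) : Prop :=
  let m := pvMaskA data also
  let t := m.rdropWhile (· == ' ')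
  (PySem.Chars.isIn pvTmp m || PySem.Chars.isIn pvStar3 m || pvStar3.tail.reverse.isSuffixOf m ||
   List.isPrefixOf (pvStar3.tail.concat ' ') m && bne t pvStar3.tail || PySem.Chars.isIn pvRun t) = true

instance (data : String) (also : String) : Decidable (D_stripNonAlphaNumaric data also) := by
  unfold D_stripNonAlphaNumaric; infer_instance

def Spec_stripNonAlphaNumaric (data : String) (also : String) (out : String) : Prop :=
  ¬ D_stripNonAlphaNumaric data also → out = stripNonAlphaNumaric_alt data also

instance (data : String) (also : String) (out : String) : Decidable (Spec_stripNonAlphaNumaric data also out) := by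
  unfold Spec_stripNonAlphaNumaric; infer_instance

def pvDiffWitness_stripNonAlphaNumaric : String × String := ("a*?", "*?")

def pvDiffWitnessOut_stripNonAlphaNumaric : String × String := ("a?*", "a*?")

-- ===== CLAIM (what is proved, stated in full; the proofs are below) =====
def Claim_unchanged_stripNonAlphaNumaric : Prop := ∀ (data : String) (also : String), Dom_stripNonAlphaNumaric data also → Spec_stripNonAlphaNumaric data also (stripNonAlphaNumaric data also)
def Claim_changed_stripNonAlphaNumaric : Prop := Dom_stripNonAlphaNumaric (pvDiffWitness_stripNonAlphaNumaric.1) (pvDiffWitness_stripNonAlphaNumaric.2) ∧ D_stripNonAlphaNumaric (pvDiffWitness_stripNonAlphaNumaric.1) (pvDiffWitness_stripNonAlphaNumaric.2) ∧ stripNonAlphaNumaric (pvDiffWitness_stripNonAlphaNumaric.1) (pvDiffWitness_stripNonAlphaNumaric.2) = pvDiffWitnessOut_stripNonAlphaNumaric.1 ∧ stripNonAlphaNumaric_alt (pvDiffWitness_stripNonAlphaNumaric.1) (pvDiffWitness_stripNonAlphaNumaric.2) = pvDiffWitnessOut_stripNonAlphaNumaric.2 ∧ pvDiffWitnessOut_stripNonAlphaNumaric.1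 ≠ pvDiffWitnessOut_stripNonAlphaNumaric.2

-- ===== LEMMAS AND PROOFS =====

-- named view of D_'s ingredients, used only by the proofs
def pvKeep (also : String) (c : Char) : Bool :=
  (("abcdefghijklmnopqrstuvwxyzABCDEFGHIJKLMNOPQRSTUVWXYZ0123456789".toList ++ also.toList).contains c) && (c != ' ')

def pvMask (data : String) (also : String) : List Char :=
  data.toList.map (fun c => if pvKeep also c then c else ' ')

def crep (old nu : List Char) : List Char → List Char
| [] => []
| c :: t =>
    if old.isPrefixOf (c :: t) then nu ++ crep old nu (t.drop (old.length - 1))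
    else c :: crep old nu t
termination_by l => l.length
decreasing_by all_goals (simp; try omega)

def ccount (pat : List Char) : List Char → Nat
| [] => 0
| c :: t =>
    if pat.isPrefixOf (c :: t) then ccount pat (t.drop (pat.length - 1)) + 1
    else ccount pat t
termination_by l => l.length
decreasing_by all_goals (simp; try omega)

theorem crep_go_eq (old nu : List Char) (hold : old ≠ []) :
    ∀ fuel l acc, l.length ≤ fuel →
      PySem.Chars.replace.go old nu fuel l acc = acc.reverse ++ crep old nu l := by
  intro fuel
  induction fuel with
  | zero => intro l acc h; have : l = [] := by simpa using List.eq_nil_of_length_eq_zero (by omega)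
            subst this; simp [PySem.Chars.replace.go, crep]
  | succ n ih =>
    intro l acc h
    match l with
    | [] => simp [PySem.Chars.replace.go, crep]
    | c :: t =>
      rw [PySem.Chars.replace.go]
      have hlen : old.length - 1 + 1 = old.length := by
        have : 0 < old.length := List.length_pos_of_ne_nil hold
        omega
      by_cases hp : old.isPrefixOf (c :: t)
      · simp only [hp, if_true]
        have hdrop : List.drop old.length (c :: t) = t.drop (old.length - 1) := by
          conv_lhs => rw [← hlen]
          rw [List.drop_succ_cons]
        have hb : (t.drop (old.length - 1)).length ≤ n := by
          have h1 : (t.drop (old.length - 1)).length ≤ t.length := by simp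
          have h2 : t.length ≤ n := by simp at h; omega
          omega
        rw [hdrop, ih _ _ hb, crep]
        simp [hp]
      · simp only [hp, if_false]
        have hb : t.length ≤ n := by simp at h; omega
        rw [ih _ _ hb, crep]
        simp [hp]

theorem replace_eq_crep (s old nu : List Char) (hold : old ≠ []) :
    PySem.Chars.replace s old nu = crep old nu s := by
  rw [PySem.Chars.replace]
  simp only [List.isEmpty_iff, hold, if_false]
  exact crep_go_eq old nu hold _ _ _ (le_refl _)

theorem ccount_go_eq (pat : List Char) (hp : pat ≠ []) :
    ∀ fuel l acc, l.length ≤ fuel →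
      PySem.Chars.count.go pat fuel l acc = acc + ccount pat l := by
  intro fuel
  induction fuel with
  | zero => intro l acc h; have : l = [] := by simpa using List.eq_nil_of_length_eq_zero (by omega)
            subst this; simp [PySem.Chars.count.go, ccount]
  | succ n ih =>
    intro l acc h
    match l with
    | [] => simp [PySem.Chars.count.go, ccount]
    | c :: t =>
      rw [PySem.Chars.count.go]
      have hlen : pat.length - 1 + 1 = pat.length := by
        have : 0 < pat.length := List.length_pos_of_ne_nil hp
        omega
      by_cases hpre : pat.isPrefixOf (c :: t)
      · simp only [hpre, if_true]
        have hdrop : List.drop pat.length (c :: t) = t.drop (pat.length - 1) := by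
          conv_lhs => rw [← hlen]
          rw [List.drop_succ_cons]
        have hb : (t.drop (pat.length - 1)).length ≤ n := by
          have h1 : (t.drop (pat.length - 1)).length ≤ t.length := by simp
          have h2 : t.length ≤ n := by simp at h; omega
          omega
        rw [hdrop, ih _ _ hb, ccount]
        simp [hpre]; omega
      · simp only [hpre, if_false]
        have hb : t.length ≤ n := by simp at h; omega
        rw [ih _ _ hb, ccount]
        simp [hpre]

theorem count_eq_ccount (s pat : List Char) (hp : pat ≠ []) :
    PySem.Chars.count s pat = ccount pat s := by
  rw [PySem.Chars.count]
  simp only [List.isEmpty_iff, hp, if_false]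
  simpa using ccount_go_eq pat hp s.length s 0 (le_refl _)

theorem ccount_pos_iff (pat : List Char) (hp : pat ≠ []) :
    ∀ s, (0 < ccount pat s ↔ pat <:+: s) := by
  intro s
  induction s using ccount.induct pat with
  | case1 => rw [ccount]; simp [List.infix_nil, hp]
  | case2 c t hpre ih =>
      rw [ccount, if_pos hpre]
      constructor
      · intro _
        exact List.infix_cons_iff.mpr (Or.inl (List.isPrefixOf_iff_prefix.mp hpre))
      · intro _; omega
  | case3 c t hpre ih =>
      rw [ccount, if_neg hpre, ih, List.infix_cons_iff]
      constructor
      · exact Or.inr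
      · rintro (h | h)
        · exact absurd (List.isPrefixOf_iff_prefix.mpr h) (by simpa using hpre)
        · exact h

theorem count_pos_iff (s pat : List Char) (hp : pat ≠ []) :
    (0 < PySem.Chars.count s pat ↔ pat <:+: s) := by
  rw [count_eq_ccount s pat hp]; exact ccount_pos_iff pat hp s

theorem crep_of_not_infix (pat nu : List Char) (hp : pat ≠ []) :
    ∀ s, ¬ pat <:+: s → crep pat nu s = s := by
  intro s
  induction s using crep.induct pat with
  | case1 => intro _; rw [crep]
  | case2 c t hpre ih =>
      intro h
      exact absurd (List.infix_cons_iff.mpr (Or.inl (List.isPrefixOf_iff_prefix.mp hpre))) h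
  | case3 c t hpre ih =>
      intro h
      rw [crep, if_neg hpre]
      rw [ih (fun hh => h (List.infix_cons_iff.mpr (Or.inr hh)))]

theorem replace_of_not_infix (s pat nu : List Char) (hp : pat ≠ []) (h : ¬ pat <:+: s) :
    PySem.Chars.replace s pat nu = s := by
  rw [replace_eq_crep s pat nu hp]; exact crep_of_not_infix pat nu hp s h

def repS2 (nu : List Char) : List Char → List Char
| [] => []
| [c] => [c]
| a :: b :: r => if a = ' ' ∧ b = ' ' then nu ++ repS2 nu r else a :: repS2 nu (b :: r)

theorem repS2_cons_ne (nu : List Char) (c : Char) (t : List Char) (h : c ≠ ' ') :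
    repS2 nu (c :: t) = c :: repS2 nu t := by
  match t with
  | [] => rfl
  | b :: r => rw [repS2, if_neg (by tauto)]

theorem crep_S2_eq (nu : List Char) : ∀ s, crep [' ', ' '] nu s = repS2 nu s := by
  intro s
  induction s using repS2.induct with
  | case1 => rw [crep, repS2]
  | case2 c =>
      rw [crep, if_neg (by simp [List.isPrefixOf])]
      rw [show crep [' ', ' '] nu [] = [] from by rw [crep]]
      rw [repS2]
  | case3 a b r h ih =>
      obtain ⟨ha, hb⟩ := h
      subst ha; subst hb
      rw [crep, if_pos (by simp [List.isPrefixOf]), repS2, if_pos (by simp)]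
      simp [ih]
  | case4 a b r h ih =>
      rw [crep, if_neg (by simp [List.isPrefixOf]; intro h1 h2; exact h ⟨h1.symm, h2.symm⟩),
          repS2, if_neg h]
      simp [ih]

def noDbl : List Char → Bool
| [] => true
| [_] => true
| a :: b :: r => (!(a == ' ' && b == ' ')) && noDbl (b :: r)

theorem noDbl_cons_ne (c : Char) (t : List Char) (h : c ≠ ' ') : noDbl (c :: t) = noDbl t := by
  match t with
  | [] => cases t <;> simp [noDbl]
  | b :: r => simp [noDbl, h]

theorem noDbl_tmp_append : ∀ x, noDbl (pvTmp ++ x) = noDbl ('}' :: x) := by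
  intro x
  rw [show pvTmp = ['{','C','9','D','C','A','A','8','1','-','3','B','8','A','-','6','8','E','9','-','E','4','C','F','-','A','4','0','5','E','2','1','9','9','C','B','9','}'] from rfl]
  simp [noDbl]

theorem noDbl_repS2_tmp : ∀ s, noDbl (repS2 pvTmp s) = true := by
  intro s
  induction s using repS2.induct with
  | case1 => rw [repS2]; rfl
  | case2 c => rw [repS2]; rfl
  | case3 a b r h ih =>
      obtain ⟨ha, hb⟩ := h; subst ha; subst hb
      rw [repS2, if_pos ⟨rfl, rfl⟩, noDbl_tmp_append, noDbl_cons_ne _ _ (by decide)]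
      exact ih
  | case4 a b r h ih =>
      rw [repS2, if_neg h]
      by_cases ha : a = ' '
      · subst ha
        have hb : b ≠ ' ' := fun hb => h ⟨rfl, hb⟩
        rw [repS2_cons_ne _ _ _ hb]
        have : noDbl (' ' :: b :: repS2 pvTmp r) = noDbl (b :: repS2 pvTmp r) := by
          simp [noDbl, hb]
        rw [this, ← repS2_cons_ne _ _ _ hb]
        exact ih
      · rw [noDbl_cons_ne _ _ ha]
        exact ih

theorem not_infix_of_noDbl : ∀ s : List Char, noDbl s = true → ¬ ([' ', ' '] <:+: s) := by
  intro s
  induction s with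
  | nil => intro _ h; simp [List.infix_nil] at h
  | cons a t ih =>
      intro hn h
      rcases List.infix_cons_iff.mp h with hpre | hinf
      · rw [List.cons_prefix_cons] at hpre
        obtain ⟨ha, hpre⟩ := hpre
        subst ha
        obtain ⟨t', ht⟩ : ∃ t', t = ' ' :: t' := by
          rcases hpre with ⟨rest, hrest⟩
          exact ⟨rest, hrest.symm⟩
        subst ht
        simp [noDbl] at hn
      · have hnt : noDbl t = true := by
          match t with
          | [] => rfl
          | b :: r => simp [noDbl] at hn; tauto
        exact ih hnt hinf

set_option maxRecDepth 8192 in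
theorem tmp_ne_nil : pvTmp ≠ [] := by decide
set_option maxRecDepth 8192 in
theorem tmp_len : pvTmp.length = 38 := by decide
set_option maxRecDepth 8192 in
theorem tmp_nospace_all : pvTmp.all (fun c => c != ' ') = true := by decide

theorem tmp_nospace : ∀ c ∈ pvTmp, c ≠ ' ' := by
  have := tmp_nospace_all
  rw [List.all_eq_true] at this
  intro c hc
  simpa using this c hc
set_option maxRecDepth 8192 in
theorem tmp_brace : ∀ k, k < 38 → 1 ≤ k → pvTmp[k]? ≠ some '{' := by decide
set_option maxRecDepth 8192 in
theorem tmp_head : pvTmp = '{' :: pvTmp.tail := by decide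
set_option maxRecDepth 8192 in
theorem tmp_tail_len : pvTmp.tail.length = 37 := by decide

theorem infix_cons_of (a : Char) {l t : List Char} (h : l <:+: t) : l <:+: a :: t :=
  h.trans (List.suffix_cons a t).isInfix

theorem tmp_split (X : List Char) : pvTmp ++ X = '{' :: (pvTmp.tail ++ X) := rfl

-- a (shifted) tail of the sentinel is a prefix of the sentinel-expanded string only
-- where it is a prefix of the original string
theorem tmp_shift_prefix : ∀ s : List Char, ∀ k, 1 ≤ k →
    pvTmp.drop k <+: repS2 pvTmp s → pvTmp.drop k <+: s := by
  intro s
  induction s using repS2.induct with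
  | case1 => intro k hk h; rw [repS2] at h; exact h
  | case2 c => intro k hk h; rw [repS2] at h; exact h
  | case3 a b r hab ih =>
      intro k hk h
      obtain ⟨ha, hb⟩ := hab; subst ha; subst hb
      rcases Nat.lt_or_ge k 38 with h38 | h38
      · exfalso
        have hlt : k < pvTmp.length := by rw [tmp_len]; exact h38
        rw [repS2, if_pos ⟨rfl, rfl⟩] at h
        rw [List.drop_eq_getElem_cons hlt, tmp_split, List.cons_prefix_cons] at h
        exact tmp_brace k h38 hk (by rw [List.getElem?_eq_getElem hlt, h.1])
      · have : pvTmp.drop k = [] := by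
          apply List.drop_eq_nil_of_le; rw [tmp_len]; exact h38
        rw [this]; exact List.nil_prefix
  | case4 a b r hab ih =>
      intro k hk h
      rcases Nat.lt_or_ge k 38 with h38 | h38
      · have hlt : k < pvTmp.length := by rw [tmp_len]; exact h38
        rw [repS2, if_neg hab] at h
        rw [List.drop_eq_getElem_cons hlt, List.cons_prefix_cons] at h
        have h2 := ih (k+1) (by omega) h.2
        rw [List.drop_eq_getElem_cons hlt, List.cons_prefix_cons]
        exact ⟨h.1, h2⟩
      · have : pvTmp.drop k = [] := by
          apply List.drop_eq_nil_of_le; rw [tmp_len]; exact h38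
        rw [this]; exact List.nil_prefix

theorem tmp_roundtrip : ∀ s : List Char, ¬ (pvTmp <:+: s) →
    crep pvTmp [' '] (repS2 pvTmp s) = repS2 [' '] s := by
  intro s
  induction s using repS2.induct with
  | case1 => intro _; rw [repS2, crep, repS2]
  | case2 c =>
      intro _
      rw [repS2, crep, if_neg (by
        intro hp
        have := (List.isPrefixOf_iff_prefix.mp hp).length_le
        rw [tmp_len] at this; simp at this)]
      rw [show crep pvTmp [' '] [] = [] from by rw [crep], repS2]
  | case3 a b r hab ih =>
      intro hni
      obtain ⟨ha, hb⟩ := hab; subst ha; subst hb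
      have hnir : ¬ (pvTmp <:+: r) := fun h => hni (infix_cons_of _ (infix_cons_of _ h))
      rw [repS2, if_pos ⟨rfl, rfl⟩, tmp_split, crep, if_pos (by
        rw [List.isPrefixOf_iff_prefix, ← tmp_split]
        exact List.prefix_append _ _)]
      rw [tmp_len]
      rw [show List.drop (38 - 1) (pvTmp.tail ++ repS2 pvTmp r) = repS2 pvTmp r from by
        rw [show (38 - 1 : Nat) = pvTmp.tail.length from by rw [tmp_tail_len]]
        exact List.drop_left]
      rw [ih hnir]
      rw [show repS2 [' '] (' ' :: ' ' :: r) = [' '] ++ repS2 [' '] r from by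
        rw [repS2, if_pos ⟨rfl, rfl⟩]]
  | case4 a b r hab ih =>
      intro hni
      rw [repS2, if_neg hab]
      have hnibr : ¬ (pvTmp <:+: (b :: r)) := fun h => hni (infix_cons_of _ h)
      rw [crep, if_neg (by
        intro hp
        rw [List.isPrefixOf_iff_prefix] at hp
        rw [show pvTmp = '{' :: pvTmp.tail from tmp_head] at hp
        rw [List.cons_prefix_cons] at hp
        obtain ⟨ha, hp⟩ := hp
        rw [show pvTmp.tail = pvTmp.drop 1 from by rw [List.drop_one]] at hp
        have h2 := tmp_shift_prefix (b :: r) 1 (by omega) hp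
        apply hni
        apply List.IsPrefix.isInfix
        rw [show pvTmp = '{' :: pvTmp.tail from tmp_head, List.cons_prefix_cons]
        exact ⟨ha, by rw [show pvTmp.tail = pvTmp.drop 1 from by rw [List.drop_one]]; exact h2⟩)]
      rw [ih hnibr]
      rw [show repS2 [' '] (a :: b :: r) = a :: repS2 [' '] (b :: r) from by
        rw [repS2, if_neg hab]]

theorem repS2_prefix_back (p : List Char) (hp : ∀ c ∈ p, c ≠ ' ') :
    ∀ s, p <+: repS2 [' '] s → p <+: s := by
  have main : ∀ s, ∀ q : List Char, (∀ c ∈ q, c ≠ ' ') → q <+: repS2 [' '] s → q <+: s := by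
    intro s
    induction s using repS2.induct with
    | case1 => intro q _ h; rw [repS2] at h; exact h
    | case2 c => intro q _ h; rw [repS2] at h; exact h
    | case3 a b r hab ih =>
        intro q hq h
        obtain ⟨ha, hb⟩ := hab; subst ha; subst hb
        match q with
        | [] => exact List.nil_prefix
        | c :: q' =>
            exfalso
            rw [repS2, if_pos ⟨rfl, rfl⟩] at h
            rw [show ([' '] ++ repS2 [' '] r) = ' ' :: repS2 [' '] r from rfl,
               List.cons_prefix_cons] at h
            exact hq c (by simp) h.1
    | case4 a b r hab ih =>
        intro q hq h
        match q with
        | [] => exact List.nil_prefix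
        | c :: q' =>
            rw [repS2, if_neg hab, List.cons_prefix_cons] at h
            have := ih q' (fun c hc => hq c (by simp [hc])) h.2
            rw [List.cons_prefix_cons]
            exact ⟨h.1, this⟩
  exact fun s => main s p hp

theorem repS2_infix_back (p : List Char) (hne : p ≠ []) (hp : ∀ c ∈ p, c ≠ ' ') :
    ∀ s, p <:+: repS2 [' '] s → p <:+: s := by
  intro s
  induction s using repS2.induct with
  | case1 => intro h; rw [repS2] at h; exact h
  | case2 c => intro h; rw [repS2] at h; exact h
  | case3 a b r hab ih =>
      intro h
      obtain ⟨ha, hb⟩ := hab; subst ha; subst hb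
      rw [repS2, if_pos ⟨rfl, rfl⟩] at h
      rw [show ([' '] ++ repS2 [' '] r) = ' ' :: repS2 [' '] r from rfl] at h
      rcases List.infix_cons_iff.mp h with hpre | hinf
      · exfalso
        match p, hne with
        | c :: q', _ =>
            rw [List.cons_prefix_cons] at hpre
            exact hp c (by simp) hpre.1
      · exact infix_cons_of _ (infix_cons_of _ (ih hinf))
  | case4 a b r hab ih =>
      intro h
      rw [repS2, if_neg hab] at h
      rcases List.infix_cons_iff.mp h with hpre | hinf
      · match p, hne with
        | c :: q', _ =>
            rw [List.cons_prefix_cons] at hpre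
            have := repS2_prefix_back q' (fun c hc => hp c (by simp [hc])) (b :: r) hpre.2
            apply List.IsPrefix.isInfix
            rw [List.cons_prefix_cons]
            exact ⟨hpre.1, this⟩
      · exact infix_cons_of _ (ih hinf)

-- ===== the three while-loops of replaceAll =====
def hNL : Nat → List Char → List Char
| 0, s => s
| n+1, s => hNL n (repS2 [' '] s)

theorem replace_S2 (s nu : List Char) : PySem.Chars.replace s [' ', ' '] nu = repS2 nu s := by
  rw [replace_eq_crep s [' ', ' '] nu (by simp), crep_S2_eq]

theorem while_noop' (s what nu : List Char) (n : Nat) (hw : what ≠ []) (hnocc : ¬ what <:+: s) :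
    pvWhileReplace (n+1) s what nu = s := by
  rw [pvWhileReplace]
  rw [if_neg (fun hpos => hnocc ((count_pos_iff s what hw).mp hpos))]

theorem while1_eq (s : List Char) (n : Nat) :
    pvWhileReplace (n+2) s [' ', ' '] pvTmp = repS2 pvTmp s := by
  by_cases hocc : [' ', ' '] <:+: s
  · rw [pvWhileReplace, if_pos ((count_pos_iff s _ (by simp)).mpr hocc), replace_S2]
    exact while_noop' _ _ _ _ (by simp)
      (not_infix_of_noDbl _ (noDbl_repS2_tmp s))
  · rw [while_noop' s _ _ (n+1) (by simp) hocc]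
    rw [← crep_S2_eq, crep_of_not_infix _ _ (by simp) s hocc]

theorem while3_eq (s : List Char) (n : Nat) (horig : ¬ pvTmp <:+: s) :
    pvWhileReplace (n+2) (repS2 pvTmp s) pvTmp [' '] = repS2 [' '] s := by
  by_cases hocc : pvTmp <:+: repS2 pvTmp s
  · rw [pvWhileReplace, if_pos ((count_pos_iff _ _ tmp_ne_nil).mpr hocc)]
    rw [replace_eq_crep _ _ _ tmp_ne_nil, tmp_roundtrip s horig]
    exact while_noop' _ _ _ _ tmp_ne_nil
      (fun h => horig (repS2_infix_back pvTmp tmp_ne_nil tmp_nospace s h))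
  · rw [while_noop' _ _ _ (n+1) tmp_ne_nil hocc]
    rw [← tmp_roundtrip s horig, crep_of_not_infix _ _ tmp_ne_nil _ hocc]

theorem replaceAll_eq (s : List Char) (h : ¬ pvTmp <:+: s) :
    pvReplaceAll s ([' '] ++ [' ']) [' '] = repS2 [' '] s := by
  simp only [pvReplaceAll]
  rw [show ([' '] ++ [' '] : List Char) = [' ', ' '] from rfl]
  rw [while1_eq s s.length]
  rw [while_noop' _ _ _ _ (by simp) (not_infix_of_noDbl _ (noDbl_repS2_tmp s))]
  rw [while3_eq s _ h]
  rw [replace_of_not_infix _ _ _ tmp_ne_nil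
    (fun hh => h (repS2_infix_back _ tmp_ne_nil tmp_nospace s hh))]

theorem replaceDuplicate_eq (s : List Char) (h : ¬ pvTmp <:+: s) :
    pvReplaceDuplicate s [' '] = hNL 11 s := by
  simp only [pvReplaceDuplicate]
  rw [replaceAll_eq s h]
  rw [show PySem.List.pyRange 0 10 1 = [0,1,2,3,4,5,6,7,8,9] from by decide]
  simp only [List.foldl_cons, List.foldl_nil]
  rw [show ([' '] ++ [' '] : List Char) = [' ', ' '] from rfl]
  simp only [replace_S2]
  rfl

def rstripSp (s : List Char) : List Char := (List.dropWhile (fun c => c == ' ') s.reverse).reverse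
def lstripSp (s : List Char) : List Char := List.dropWhile (fun c => c == ' ') s

theorem star3_infix_of_pat4 {r : List Char} (p : List Char) (hsp : pvStar3 <+: p)
    (h : p <:+: r) : pvStar3 <:+: r :=
  (hsp.isInfix).trans h

theorem star_shift : ∀ v : List Char, pvStar3 <+: (v ++ [' '] ++ pvStar3) → pvStar3 <:+: (v ++ [' ']) := by
  intro v h
  match v with
  | [] => simp [pvStar3, List.cons_prefix_cons] at h
  | [x] => simp [pvStar3, List.cons_prefix_cons] at h
  | [x, y] => simp [pvStar3, List.cons_prefix_cons] at h
  | x :: y :: z :: v' =>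
      simp only [List.cons_append, List.cons_prefix_cons, pvStar3] at h
      obtain ⟨hx, hy, hz, -⟩ := h
      subst hx; subst hy; subst hz
      apply List.IsPrefix.isInfix
      simp [pvStar3, List.cons_prefix_cons]

theorem ce_R1 : ∀ u : List Char, ¬ (pvStar3 <:+: (u ++ [' '])) →
    crep (' ' :: pvStar3) [] ((u ++ [' ']) ++ pvStar3) = u := by
  intro u
  induction u with
  | nil => intro _; simp [crep, pvStar3, List.isPrefixOf]
  | cons c u' ih =>
      intro hni
      simp only [List.cons_append, List.nil_append]
      rw [crep, if_neg (by
        intro hp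
        rw [List.isPrefixOf_iff_prefix] at hp
        rw [List.cons_prefix_cons] at hp
        obtain ⟨hc, hp⟩ := hp
        rw [show (u' ++ [' ']) ++ pvStar3 = u' ++ [' '] ++ pvStar3 from by simp] at hp
        have := star_shift u' hp
        exact hni (infix_cons_of _ this))]
      have hni' : ¬ (pvStar3 <:+: (u' ++ [' '])) := fun hh => hni (infix_cons_of _ hh)
      rw [ih hni']

theorem ce_R2 : ∀ s : List Char, ¬ (pvStar3 <:+: s) → ¬ ([' '] <:+ s) → ¬ (['*', '?'] <:+ s) →
    crep (' ' :: pvStar3) [] (s ++ pvStar3) = s ++ pvStar3 := by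
  intro s
  induction s with
  | nil => intro _ _ _; simp [crep, pvStar3, List.isPrefixOf]
  | cons c r ih =>
      intro hI hS hQ
      simp only [List.cons_append, List.nil_append]
      rw [crep, if_neg (by
        intro hp
        rw [List.isPrefixOf_iff_prefix] at hp
        rw [List.cons_prefix_cons] at hp
        obtain ⟨hc, hp⟩ := hp
        subst hc
        match r, hp with
        | [], hp => exact hS (List.suffix_refl _)
        | [x], hp => simp [pvStar3, List.cons_prefix_cons] at hp
        | [x, y], hp =>
            simp [pvStar3, List.cons_prefix_cons] at hp
            obtain ⟨hx, hy⟩ := hp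
            subst hx; subst hy
            exact hQ (by simp)
        | x :: y :: z :: r', hp =>
            simp only [List.cons_append, List.cons_prefix_cons, pvStar3] at hp
            obtain ⟨hx, hy, hz, -⟩ := hp
            subst hx; subst hy; subst hz
            exact hI (infix_cons_of _ (List.IsPrefix.isInfix (by simp [pvStar3, List.cons_prefix_cons]))))]
      rw [ih (fun h => hI (infix_cons_of _ h))
            (fun h => hS (h.trans (List.suffix_cons _ _)))
            (fun h => hQ (h.trans (List.suffix_cons _ _)))]

theorem ce_R3 : ∀ s : List Char, ¬ (pvStar3 <:+: s) → ¬ (['*', '?'] <:+ s) →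
    crep pvStar3 [] (s ++ pvStar3) = s := by
  intro s
  induction s with
  | nil => intro _ _; simp [crep, pvStar3, List.isPrefixOf]
  | cons c r ih =>
      intro hI hQ
      simp only [List.cons_append, List.nil_append]
      rw [crep, if_neg (by
        intro hp
        rw [List.isPrefixOf_iff_prefix] at hp
        match r, hp with
        | [], hp => simp [pvStar3, List.cons_prefix_cons] at hp
        | [x], hp =>
            simp [pvStar3, List.cons_prefix_cons] at hp
            obtain ⟨hc, hx⟩ := hp
            subst hc; subst hx
            exact hQ (by simp)
        | x :: y :: r', hp =>
            simp only [List.cons_append, List.cons_prefix_cons, pvStar3] at hp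
            obtain ⟨hc, hx, hy, -⟩ := hp
            subst hc; subst hx; subst hy
            exact hI (List.IsPrefix.isInfix (by simp [pvStar3, List.cons_prefix_cons])))]
      rw [ih (fun h => hI (infix_cons_of _ h)) (fun h => hQ (h.trans (List.suffix_cons _ _)))]

theorem rstrip_app_space (u : List Char) : rstripSp (u ++ [' ']) = rstripSp u := by
  simp [rstripSp]

theorem rstrip_no_end (u : List Char) (h : ¬ ([' '] <:+ u)) : rstripSp u = u := by
  cases hu : u.reverse with
  | nil =>
      have : u = [] := by simpa using congrArg List.reverse hu
      subst this; rfl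
  | cons c t =>
      have hc : c ≠ ' ' := by
        intro hc; subst hc
        apply h
        have : u = t.reverse ++ [' '] := by
          have := congrArg List.reverse hu
          simpa using this
        rw [this]
        exact List.suffix_append _ _
      rw [rstripSp, hu, List.dropWhile_cons_of_neg (by simp [hc])]
      rw [← hu]
      simp

theorem lstrip_no_head (u : List Char) (h : ¬ ([' '] <+: u)) : lstripSp u = u := by
  match u with
  | [] => rfl
  | c :: t =>
      have hc : c ≠ ' ' := by
        intro hc; subst hc; exact h (by simp [List.cons_prefix_cons])
      rw [lstripSp, List.dropWhile_cons_of_neg (by simp [hc])]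

theorem cleanEnd_eq : ∀ (fuel : Nat) (s : List Char), s.length < fuel → ¬ (pvStar3 <:+: s) →
    (([' '] <:+ s) ∨ ¬ (['*', '?'] <:+ s)) →
    pvCleanEnd fuel s [' '] = rstripSp s := by
  intro fuel
  induction fuel with
  | zero => intro s h; omega
  | succ n ih =>
      intro s hlen hI hAlt
      simp only [pvCleanEnd]
      rw [show (pvStar3 : List Char) = ['*', '?', '*'] from rfl]
      by_cases hend : [' '] <:+ s
      · obtain ⟨u, hu⟩ := hend
        subst hu
        have h2 : PySem.Chars.replace ((u ++ [' ']) ++ ['*', '?', '*']) ([' '] ++ ['*', '?', '*']) [] = u := by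
          rw [replace_eq_crep _ _ _ (by simp)]
          exact ce_R1 u hI
        rw [h2]
        have hIu : ¬ (pvStar3 <:+: u) := fun h => hI (h.trans (List.prefix_append _ _).isInfix)
        have h3 : PySem.Chars.replace u ['*', '?', '*'] [] = u :=
          replace_of_not_infix _ _ _ (by simp) hIu
        rw [h3]
        by_cases hu2 : [' '] <:+ u
        · rw [if_pos (by rw [PySem.Chars.endswith]; exact List.isSuffixOf_iff_suffix.mpr hu2)]
          rw [ih u (by simp at hlen; omega) hIu (Or.inl hu2)]
          rw [rstrip_app_space]
        · rw [if_neg (by rw [PySem.Chars.endswith]; intro hh; exact hu2 (List.isSuffixOf_iff_suffix.mp hh))]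
          rw [rstrip_app_space, rstrip_no_end u hu2]
      · have hQ : ¬ (['*', '?'] <:+ s) := hAlt.resolve_left hend
        have h2 : PySem.Chars.replace (s ++ ['*', '?', '*']) ([' '] ++ ['*', '?', '*']) [] = s ++ ['*', '?', '*'] := by
          rw [replace_eq_crep _ _ _ (by simp)]
          exact ce_R2 s hI hend hQ
        rw [h2]
        have h3 : PySem.Chars.replace (s ++ ['*', '?', '*']) ['*', '?', '*'] [] = s := by
          rw [replace_eq_crep _ _ _ (by simp)]
          exact ce_R3 s hI hQ
        rw [h3]
        rw [if_neg (by rw [PySem.Chars.endswith]; intro hh; exact hend (List.isSuffixOf_iff_suffix.mp hh))]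
        rw [rstrip_no_end s hend]

theorem cf_F1 (r : List Char) (hI : ¬ (pvStar3 <:+: (' ' :: r))) :
    crep (pvStar3 ++ [' ']) [] (pvStar3 ++ (' ' :: r)) = r := by
  have hIr : ¬ ((pvStar3 ++ [' ']) <:+: r) := by
    intro h
    exact hI (infix_cons_of _ (star3_infix_of_pat4 _ (List.prefix_append _ _) h))
  rw [show pvStar3 ++ (' ' :: r) = '*' :: '?' :: '*' :: ' ' :: r from rfl]
  rw [crep, if_pos (by
    rw [List.isPrefixOf_iff_prefix]
    rw [show (pvStar3 ++ [' '] : List Char) = '*' :: '?' :: '*' :: ' ' :: [] from rfl]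
    simp [List.cons_prefix_cons])]
  rw [show ((pvStar3 ++ [' ']).length - 1 : Nat) = 3 from by simp [pvStar3]]
  rw [show List.drop 3 ('?' :: '*' :: ' ' :: r) = r from rfl]
  rw [crep_of_not_infix _ _ (by simp [pvStar3]) r hIr]
  rfl

theorem crep_cons_step (old nu : List Char) (c : Char) (t : List Char)
    (h : ¬ (old.isPrefixOf (c :: t) = true)) :
    crep old nu (c :: t) = c :: crep old nu t := by
  rw [crep, if_neg h]

theorem cf_F2 (s : List Char) (hI : ¬ (pvStar3 <:+: s)) (hS : ¬ ([' '] <+: s))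
    (hQ : ¬ (['?', '*', ' '] <+: s)) :
    crep (pvStar3 ++ [' ']) [] (pvStar3 ++ s) = pvStar3 ++ s := by
  have hIs : ¬ ((pvStar3 ++ [' ']) <:+: s) := by
    intro h
    exact hI (star3_infix_of_pat4 _ (List.prefix_append _ _) h)
  rw [show pvStar3 ++ s = '*' :: '?' :: '*' :: s from rfl]
  rw [crep_cons_step _ _ _ _ (by
    intro hp
    rw [List.isPrefixOf_iff_prefix] at hp
    rw [show (pvStar3 ++ [' '] : List Char) = '*' :: '?' :: '*' :: ' ' :: [] from rfl] at hp
    simp only [List.cons_prefix_cons] at hp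
    obtain ⟨-, -, -, hp⟩ := hp
    exact hS (by
      obtain ⟨t, ht⟩ := hp
      exact ⟨t, by simpa using ht⟩))]
  rw [crep_cons_step _ _ _ _ (by
    intro hp
    rw [List.isPrefixOf_iff_prefix] at hp
    rw [show (pvStar3 ++ [' '] : List Char) = '*' :: '?' :: '*' :: ' ' :: [] from rfl] at hp
    simp [List.cons_prefix_cons] at hp)]
  rw [crep_cons_step _ _ _ _ (by
    intro hp
    rw [List.isPrefixOf_iff_prefix] at hp
    rw [show (pvStar3 ++ [' '] : List Char) = '*' :: '?' :: '*' :: ' ' :: [] from rfl] at hp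
    rw [List.cons_prefix_cons] at hp
    exact hQ hp.2)]
  rw [crep_of_not_infix _ _ (by simp [pvStar3]) s hIs]

theorem cf_F3 (s : List Char) (hI : ¬ (pvStar3 <:+: s)) :
    crep pvStar3 [] (pvStar3 ++ s) = s := by
  rw [show pvStar3 ++ s = '*' :: '?' :: '*' :: s from rfl]
  rw [crep, if_pos (by
    rw [List.isPrefixOf_iff_prefix]
    rw [show ('*' :: '?' :: '*' :: s) = pvStar3 ++ s from rfl]
    exact List.prefix_append _ _)]
  rw [show (pvStar3.length - 1 : Nat) = 2 from by simp [pvStar3]]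
  rw [show List.drop 2 ('?' :: '*' :: s) = s from rfl]
  rw [crep_of_not_infix _ _ (by simp [pvStar3]) s hI]
  rfl

theorem lstrip_cons_space (r : List Char) : lstripSp (' ' :: r) = lstripSp r := by
  simp [lstripSp]

theorem cleanFirst_eq : ∀ (fuel : Nat) (s : List Char), s.length < fuel → ¬ (pvStar3 <:+: s) →
    (([' '] <+: s) ∨ ¬ (['?', '*', ' '] <+: s)) →
    pvCleanFirst fuel s [' '] = lstripSp s := by
  intro fuel
  induction fuel with
  | zero => intro s h; omega
  | succ n ih =>
      intro s hlen hI hAlt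
      simp only [pvCleanFirst]
      rw [show (pvStar3 : List Char) = ['*', '?', '*'] from rfl]
      rcases hs : s with - | ⟨c, r⟩
      · subst hs
        have h2 : PySem.Chars.replace (['*', '?', '*'] ++ ([] : List Char)) (['*', '?', '*'] ++ [' ']) [] = pvStar3 ++ [] := by
          rw [replace_eq_crep _ _ _ (by simp)]
          exact cf_F2 [] (by simp [List.infix_nil, pvStar3]) (by simp) (by simp)
        rw [h2]
        have h3 : PySem.Chars.replace (pvStar3 ++ ([] : List Char)) ['*', '?', '*'] [] = [] := by
          rw [replace_eq_crep _ _ _ (by simp)]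
          exact cf_F3 [] (by simp [List.infix_nil, pvStar3])
        rw [h3]
        rw [if_neg (by rw [PySem.Chars.startswith]; simp [List.isPrefixOf])]
        rfl
      · subst hs
        by_cases hc : c = ' '
        · subst hc
          have h2 : PySem.Chars.replace (['*', '?', '*'] ++ (' ' :: r)) (['*', '?', '*'] ++ [' ']) [] = r := by
            rw [replace_eq_crep _ _ _ (by simp)]
            exact cf_F1 r hI
          rw [h2]
          have hIr : ¬ (pvStar3 <:+: r) := fun h => hI (infix_cons_of _ h)
          have h3 : PySem.Chars.replace r ['*', '?', '*'] [] = r :=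
            replace_of_not_infix _ _ _ (by simp) hIr
          rw [h3]
          by_cases h4 : [' '] <+: r
          · rw [if_pos (by rw [PySem.Chars.startswith]; exact List.isPrefixOf_iff_prefix.mpr h4)]
            rw [ih r (by simp at hlen; omega) hIr (Or.inl h4)]
            rw [lstrip_cons_space]
          · rw [if_neg (by rw [PySem.Chars.startswith]; intro hh; exact h4 (List.isPrefixOf_iff_prefix.mp hh))]
            rw [lstrip_cons_space, lstrip_no_head r h4]
        · have hS : ¬ ([' '] <+: (c :: r)) := by
            intro h; rw [List.cons_prefix_cons] at h; exact hc h.1.symm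
          have hQ : ¬ (['?', '*', ' '] <+: (c :: r)) := hAlt.resolve_left hS
          have h2 : PySem.Chars.replace (['*', '?', '*'] ++ (c :: r)) (['*', '?', '*'] ++ [' ']) [] = pvStar3 ++ (c :: r) := by
            rw [replace_eq_crep _ _ _ (by simp)]
            exact cf_F2 (c :: r) hI hS hQ
          rw [h2]
          have h3 : PySem.Chars.replace (pvStar3 ++ (c :: r)) ['*', '?', '*'] [] = c :: r := by
            rw [replace_eq_crep _ _ _ (by simp)]
            exact cf_F3 (c :: r) hI
          rw [h3]
          rw [if_neg (by rw [PySem.Chars.startswith]; intro hh; exact hS (List.isPrefixOf_iff_prefix.mp hh))]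
          rw [lstrip_no_head _ hS]

inductive pvRS where
  | tl : Nat → pvRS
  | wd : Nat → List Char → pvRS → pvRS
deriving DecidableEq, Repr

def pvBump : pvRS → pvRS
| .tl a => .tl (a+1)
| .wd a w r => .wd (a+1) w r

def pvPush (c : Char) : pvRS → pvRS
| .wd 0 w r => .wd 0 (c :: w) r
| rs => .wd 0 [c] rs

def pvParse : List Char → pvRS
| [] => .tl 0
| c :: r => if c = ' ' then pvBump (pvParse r) else pvPush c (pvParse r)

def pvWords : pvRS → List (List Char)
| .tl _ => []
| .wd _ w r => w :: pvWords r

def pvIgapsR : pvRS → List Nat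
| .tl _ => []
| .wd a _ r => a :: pvIgapsR r

def pvIgaps : pvRS → List Nat
| .tl _ => []
| .wd _ _ r => pvIgapsR r

def pvHeadGap : pvRS → Nat
| .tl a => a
| .wd a _ _ => a

def pvTailGap : pvRS → Nat
| .tl a => a
| .wd _ _ r => pvTailGap r

def pvRender : pvRS → List Char
| .tl a => List.replicate a ' '
| .wd a w r => List.replicate a ' ' ++ w ++ pvRender r

def pvWOK : pvRS → Bool
| .tl _ => true
| .wd _ w r => (!w.isEmpty) && w.all (fun c => c != ' ') && pvWOK r

def pvGapsR : pvRS → Bool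
| .tl _ => true
| .wd a _ r => decide (1 ≤ a) && pvGapsR r

def pvGapsOK : pvRS → Bool
| .tl _ => true
| .wd _ _ r => pvGapsR r

theorem render_bump (r : pvRS) : pvRender (pvBump r) = ' ' :: pvRender r := by
  cases r <;> simp [pvBump, pvRender, List.replicate_succ]

theorem render_push (c : Char) (r : pvRS) : pvRender (pvPush c r) = c :: pvRender r := by
  match r with
  | .tl a => simp [pvPush, pvRender]
  | .wd 0 w r' => simp [pvPush, pvRender]
  | .wd (a+1) w r' => simp [pvPush, pvRender]

theorem render_parse : ∀ s : List Char, pvRender (pvParse s) = s := by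
  intro s
  induction s with
  | nil => rfl
  | cons c r ih =>
      rw [pvParse]
      by_cases hc : c = ' '
      · subst hc; rw [if_pos rfl, render_bump, ih]
      · rw [if_neg hc, render_push, ih]

theorem wok_bump (r : pvRS) : pvWOK (pvBump r) = pvWOK r := by
  cases r <;> simp [pvBump, pvWOK]

theorem wok_push (c : Char) (hc : c ≠ ' ') (r : pvRS) (h : pvWOK r = true) :
    pvWOK (pvPush c r) = true := by
  match r with
  | .tl a => simp [pvPush, pvWOK, hc]
  | .wd 0 w r' => simp [pvPush, pvWOK, hc] at h ⊢; tauto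
  | .wd (a+1) w r' => simp [pvPush, pvWOK, hc] at h ⊢; tauto

theorem parse_wok : ∀ s : List Char, pvWOK (pvParse s) = true := by
  intro s
  induction s with
  | nil => rfl
  | cons c r ih =>
      rw [pvParse]
      by_cases hc : c = ' '
      · subst hc; rw [if_pos rfl, wok_bump]; exact ih
      · rw [if_neg hc]; exact wok_push c hc _ ih

theorem gaps_bump (r : pvRS) (h : pvGapsOK r = true) : pvGapsOK (pvBump r) = true := by
  cases r <;> simpa [pvBump, pvGapsOK] using h

theorem gaps_push (c : Char) (r : pvRS) (h : pvGapsOK r = true) : pvGapsOK (pvPush c r) = true := by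
  match r with
  | .tl a => simp [pvPush, pvGapsOK, pvGapsR]
  | .wd 0 w r' => simpa [pvPush, pvGapsOK, pvGapsR] using h
  | .wd (a+1) w r' =>
      simp [pvPush, pvGapsOK, pvGapsR] at h ⊢
      exact h

theorem parse_gaps : ∀ s : List Char, pvGapsOK (pvParse s) = true := by
  intro s
  induction s with
  | nil => rfl
  | cons c r ih =>
      rw [pvParse]
      by_cases hc : c = ' '
      · subst hc; rw [if_pos rfl]; exact gaps_bump _ ih
      · rw [if_neg hc]; exact gaps_push c _ ih

def pvHalveRS : pvRS → pvRS
| .tl a => .tl ((a+1)/2)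
| .wd a w r => .wd ((a+1)/2) w (pvHalveRS r)

theorem repS2_cons_sp_ne (nu : List Char) (b : Char) (r : List Char) (hb : b ≠ ' ') :
    repS2 nu (' ' :: b :: r) = ' ' :: repS2 nu (b :: r) := by
  rw [repS2, if_neg (fun h => hb h.2)]

theorem repS2_word_append (nu : List Char) :
    ∀ w u : List Char, (∀ c ∈ w, c ≠ ' ') → repS2 nu (w ++ u) = w ++ repS2 nu u := by
  intro w
  induction w with
  | nil => intro u _; rfl
  | cons c w' ih =>
      intro u hw
      rw [List.cons_append, repS2_cons_ne _ _ _ (hw c (by simp))]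
      rw [ih u (fun c hc => hw c (by simp [hc]))]
      simp

theorem repS2_replicate (a : Nat) :
    ∀ t : List Char, (t = [] ∨ ∃ c t', t = c :: t' ∧ c ≠ ' ') →
    repS2 [' '] (List.replicate a ' ' ++ t) = List.replicate ((a+1)/2) ' ' ++ repS2 [' '] t := by
  induction a using Nat.strong_induction_on with
  | _ a ih =>
      intro t ht
      match a with
      | 0 => simp
      | 1 =>
          rcases ht with h | ⟨c, t', h, hc⟩
          · subst h; simp [repS2]
          · subst h
            rw [show List.replicate 1 ' ' ++ (c :: t') = ' ' :: c :: t' from rfl]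
            rw [repS2_cons_sp_ne _ _ _ hc]
            rfl
      | a+2 =>
          rw [show List.replicate (a+2) ' ' ++ t = ' ' :: ' ' :: (List.replicate a ' ' ++ t) from by
            simp [List.replicate_succ]]
          rw [repS2, if_pos ⟨rfl, rfl⟩]
          rw [ih a (by omega) t ht]
          rw [show ((a+2)+1)/2 = (a+1)/2 + 1 from by omega]
          simp [List.replicate_succ]

theorem wok_parts {a : Nat} {w : List Char} {r : pvRS} (h : pvWOK (.wd a w r) = true) :
    w ≠ [] ∧ (∀ c ∈ w, c ≠ ' ') ∧ pvWOK r = true := by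
  simp [pvWOK] at h
  obtain ⟨⟨h1, h2⟩, h3⟩ := h
  refine ⟨by simpa [List.isEmpty_iff] using h1, ?_, h3⟩
  intro c hc
  simpa using h2 c hc

theorem halve_render : ∀ rs : pvRS, pvWOK rs = true →
    repS2 [' '] (pvRender rs) = pvRender (pvHalveRS rs) := by
  intro rs
  induction rs with
  | tl a =>
      intro _
      rw [pvRender, pvHalveRS, pvRender]
      have := repS2_replicate a [] (Or.inl rfl)
      simpa [repS2] using this
  | wd a w r ih =>
      intro h
      obtain ⟨hw1, hw2, hw3⟩ := wok_parts h
      rw [pvRender, pvHalveRS, pvRender]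
      have hhd : (w ++ pvRender r) = [] ∨ ∃ c t', (w ++ pvRender r) = c :: t' ∧ c ≠ ' ' := by
        match w, hw1 with
        | c :: w', _ => exact Or.inr ⟨c, w' ++ pvRender r, by simp, hw2 c (by simp)⟩
      rw [List.append_assoc, repS2_replicate a _ hhd, repS2_word_append _ w _ hw2, ih hw3]
      simp

theorem words_halve (rs : pvRS) : pvWords (pvHalveRS rs) = pvWords rs := by
  induction rs with
  | tl a => rfl
  | wd a w r ih => simp [pvHalveRS, pvWords, ih]

theorem wok_halve (rs : pvRS) : pvWOK (pvHalveRS rs) = pvWOK rs := by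
  induction rs with
  | tl a => rfl
  | wd a w r ih => simp [pvHalveRS, pvWOK, ih]

theorem gapsR_halve (rs : pvRS) (h : pvGapsR rs = true) : pvGapsR (pvHalveRS rs) = true := by
  induction rs with
  | tl a => rfl
  | wd a w r ih =>
      simp [pvHalveRS, pvGapsR] at h ⊢
      exact ⟨by omega, ih h.2⟩

theorem gapsOK_halve (rs : pvRS) (h : pvGapsOK rs = true) : pvGapsOK (pvHalveRS rs) = true := by
  cases rs with
  | tl a => rfl
  | wd a w r => simpa [pvHalveRS, pvGapsOK] using gapsR_halve r (by simpa [pvGapsOK] using h)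

theorem tailGap_halve (rs : pvRS) : pvTailGap (pvHalveRS rs) = (pvTailGap rs + 1) / 2 := by
  induction rs with
  | tl a => rfl
  | wd a w r ih => simpa [pvHalveRS, pvTailGap] using ih

theorem headGap_halve (rs : pvRS) : pvHeadGap (pvHalveRS rs) = (pvHeadGap rs + 1) / 2 := by
  cases rs <;> rfl

theorem igapsR_halve (rs : pvRS) :
    pvIgapsR (pvHalveRS rs) = (pvIgapsR rs).map (fun a => (a+1)/2) := by
  induction rs with
  | tl a => rfl
  | wd a w r ih => simp [pvHalveRS, pvIgapsR, ih]

theorem igaps_halve (rs : pvRS) :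
    pvIgaps (pvHalveRS rs) = (pvIgaps rs).map (fun a => (a+1)/2) := by
  cases rs with
  | tl a => rfl
  | wd a w r => simpa [pvHalveRS, pvIgaps] using igapsR_halve r

def pvHN : Nat → pvRS → pvRS
| 0, rs => rs
| n+1, rs => pvHN n (pvHalveRS rs)

def pvGI : Nat → Nat → Nat
| 0, a => a
| n+1, a => pvGI n ((a+1)/2)

theorem hNL_render : ∀ (n : Nat) (rs : pvRS), pvWOK rs = true →
    hNL n (pvRender rs) = pvRender (pvHN n rs) := by
  intro n
  induction n with
  | zero => intro rs _; rfl
  | succ m ih =>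
      intro rs h
      rw [hNL, halve_render rs h, pvHN]
      exact ih _ (by rw [wok_halve]; exact h)

theorem words_hN (n : Nat) (rs : pvRS) : pvWords (pvHN n rs) = pvWords rs := by
  induction n generalizing rs with
  | zero => rfl
  | succ m ih => rw [pvHN, ih, words_halve]

theorem wok_hN (n : Nat) (rs : pvRS) : pvWOK (pvHN n rs) = pvWOK rs := by
  induction n generalizing rs with
  | zero => rfl
  | succ m ih => rw [pvHN, ih, wok_halve]

theorem gapsOK_hN (n : Nat) (rs : pvRS) (h : pvGapsOK rs = true) : pvGapsOK (pvHN n rs) = true := by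
  induction n generalizing rs with
  | zero => exact h
  | succ m ih => rw [pvHN]; exact ih _ (gapsOK_halve rs h)

theorem tailGap_hN (n : Nat) (rs : pvRS) : pvTailGap (pvHN n rs) = pvGI n (pvTailGap rs) := by
  induction n generalizing rs with
  | zero => rfl
  | succ m ih => rw [pvHN, ih, tailGap_halve, pvGI]

theorem headGap_hN (n : Nat) (rs : pvRS) : pvHeadGap (pvHN n rs) = pvGI n (pvHeadGap rs) := by
  induction n generalizing rs with
  | zero => rfl
  | succ m ih => rw [pvHN, ih, headGap_halve, pvGI]

theorem igaps_hN (n : Nat) (rs : pvRS) : pvIgaps (pvHN n rs) = (pvIgaps rs).map (pvGI n) := by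
  induction n generalizing rs with
  | zero => simp [pvGI]; rfl
  | succ m ih =>
      rw [pvHN, ih, igaps_halve, List.map_map]
      rfl

theorem pvGI_zero (n : Nat) : pvGI n 0 = 0 := by
  induction n with
  | zero => rfl
  | succ m ih => simpa [pvGI] using ih

theorem pvGI_pos (n : Nat) : ∀ a, 1 ≤ a → 1 ≤ pvGI n a := by
  induction n with
  | zero => intro a h; exact h
  | succ m ih => intro a h; rw [pvGI]; exact ih _ (by omega)

theorem pvGI_collapse : ∀ (n : Nat) (a : Nat), 1 ≤ a → a ≤ 2^n → pvGI n a = 1 := by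
  intro n
  induction n with
  | zero => intro a h1 h2; rw [pvGI]; simp at h2; omega
  | succ m ih =>
      intro a h1 h2
      rw [pvGI]
      rw [pow_succ] at h2
      have hK : ∃ K, (2:Nat)^m = K := ⟨_, rfl⟩
      obtain ⟨K, hKe⟩ := hK
      rw [hKe] at h2
      apply ih
      · omega
      · rw [hKe]; omega

def pvSet0T : pvRS → pvRS
| .tl _ => .tl 0
| .wd a w r => .wd a w (pvSet0T r)

def pvSet0H : pvRS → pvRS
| .tl _ => .tl 0
| .wd _ w r => .wd 0 w r

theorem rstrip_append (x y : List Char) :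
    rstripSp (x ++ y) = if rstripSp y = [] then rstripSp x else x ++ rstripSp y := by
  simp only [rstripSp, List.reverse_append, List.dropWhile_append]
  by_cases h : (List.dropWhile (fun c => c == ' ') y.reverse).isEmpty
  · rw [if_pos h, if_pos (by simpa [List.isEmpty_iff] using h)]
  · rw [if_neg h, if_neg (by simpa [List.isEmpty_iff] using h)]
    simp

theorem rstrip_replicate (a : Nat) : rstripSp (List.replicate a ' ') = [] := by
  simp [rstripSp]

theorem rstrip_word (w : List Char) (hw : ∀ c ∈ w, c ≠ ' ') : rstripSp w = w := by
  apply rstrip_no_end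
  intro h
  match w, h with
  | _, ⟨t, ht⟩ =>
      have : ' ' ∈ t ++ [' '] := by simp
      rw [ht] at this
      exact hw ' ' this rfl

theorem render_wd_ne_nil (a : Nat) (w : List Char) (r : pvRS) (hw : w ≠ []) :
    pvRender (.wd a w r) ≠ [] := by
  intro h
  rw [pvRender] at h
  simp only [List.append_assoc, List.append_eq_nil_iff] at h
  exact hw h.2.1

theorem set0T_render : ∀ rs : pvRS, pvWOK rs = true →
    rstripSp (pvRender rs) = pvRender (pvSet0T rs) := by
  intro rs
  induction rs with
  | tl a => intro _; rw [pvRender, pvSet0T, pvRender]; simpa using rstrip_replicate a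
  | wd a w r ih =>
      intro h
      obtain ⟨hw1, hw2, hw3⟩ := wok_parts h
      rw [pvRender, pvSet0T, pvRender, rstrip_append]
      cases r with
      | tl b =>
          rw [if_pos (by rw [pvRender]; exact rstrip_replicate b)]
          rw [rstrip_append]
          rw [if_neg (by rw [rstrip_word w hw2]; exact hw1)]
          rw [rstrip_word w hw2]
          rw [show pvRender (pvSet0T (pvRS.tl b)) = [] from rfl]
          simp
      | wd b w' r' =>
          have hne : pvRender (pvSet0T (pvRS.wd b w' r')) ≠ [] := by
            rw [show pvSet0T (pvRS.wd b w' r') = .wd b w' (pvSet0T r') from rfl]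
            exact render_wd_ne_nil _ _ _ (wok_parts hw3).1
          rw [ih hw3, if_neg hne]

theorem lstrip_replicate_append (a : Nat) (t : List Char) :
    lstripSp (List.replicate a ' ' ++ t) = lstripSp t := by
  induction a with
  | zero => simp
  | succ m ih => simpa [List.replicate_succ, lstripSp] using ih

theorem set0H_render : ∀ rs : pvRS, pvWOK rs = true →
    lstripSp (pvRender rs) = pvRender (pvSet0H rs) := by
  intro rs h
  cases rs with
  | tl a =>
      rw [pvRender, pvSet0H, pvRender]
      simpa using lstrip_replicate_append a []
  | wd a w r =>
      obtain ⟨hw1, hw2, hw3⟩ := wok_parts h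
      rw [pvRender, pvSet0H, pvRender, List.append_assoc, lstrip_replicate_append]
      rw [lstrip_no_head _ (by
        intro hp
        match w, hw1, hp with
        | c :: w', _, hp =>
            rw [List.cons_append, List.cons_prefix_cons] at hp
            exact hw2 c (by simp) hp.1.symm)]
      simp

theorem wok_set0T (rs : pvRS) : pvWOK (pvSet0T rs) = pvWOK rs := by
  induction rs with
  | tl a => rfl
  | wd a w r ih => simp [pvSet0T, pvWOK, ih]

def pvAuxJ : List (List Char) → List Char
| [] => []
| w :: ws => ' ' :: (w ++ pvAuxJ ws)

def pvJn : List (List Char) → List Char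
| [] => []
| w :: ws => w ++ pvAuxJ ws

def pvAll1R : pvRS → Bool
| .tl _ => true
| .wd a _ r => (a == 1) && pvAll1R r

theorem rest_render : ∀ r : pvRS, pvAll1R r = true →
    pvRender (pvSet0T r) = pvAuxJ (pvWords r) := by
  intro r
  induction r with
  | tl a => intro _; rfl
  | wd a w r' ih =>
      intro h
      simp only [pvAll1R, Bool.and_eq_true, beq_iff_eq] at h
      obtain ⟨ha, h2⟩ := h
      subst ha
      rw [pvSet0T, pvRender, pvWords, pvAuxJ, ih h2]
      rfl

theorem trim_render_eq_join : ∀ rs : pvRS,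
    (match rs with | .tl _ => True | .wd _ _ r => pvAll1R r = true) →
    pvRender (pvSet0H (pvSet0T rs)) = pvJn (pvWords rs) := by
  intro rs h
  cases rs with
  | tl a => rfl
  | wd a w r =>
      rw [show pvSet0T (pvRS.wd a w r) = .wd a w (pvSet0T r) from rfl]
      rw [show pvSet0H (pvRS.wd a w (pvSet0T r)) = .wd 0 w (pvSet0T r) from rfl]
      rw [pvRender, pvWords, pvJn]
      rw [rest_render r h]
      simp

theorem jn_eq_join : ∀ ws : List (List Char), PySem.Chars.join [' '] ws = pvJn ws := by
  intro ws
  match ws with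
  | [] => rfl
  | [w] => simp [PySem.Chars.join, pvJn, pvAuxJ, List.intercalate]
  | w :: w' :: ws' =>
      have ih := jn_eq_join (w' :: ws')
      rw [show PySem.Chars.join [' '] (w :: w' :: ws') = w ++ [' '] ++ PySem.Chars.join [' '] (w' :: ws') from
        PySem.Chars.join_cons_cons _ _ _ _]
      rw [ih]
      rw [pvJn, pvJn, pvAuxJ]
      simp

def pvTokStep (st : List (List Char) × List Char) (c : Char) : List (List Char) × List Char :=
  if c ≠ ' ' then (st.1, st.2 ++ [c])
  else if st.2 ≠ [] then (st.1 ++ [st.2], []) else (st.1, [])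

def pvFin (st : List (List Char) × List Char) : List (List Char) :=
  if st.2 ≠ [] then st.1 ++ [st.2] else st.1

theorem tokStep_space (st : List (List Char) × List Char) : pvTokStep st ' ' = (pvFin st, []) := by
  rw [pvTokStep, if_neg (by simp), pvFin]
  by_cases h : st.2 = []
  · rw [if_neg (by simpa using h), if_neg (by simpa using h)]
  · rw [if_pos h, if_pos h]

theorem pvFin_pair (x : List (List Char)) : pvFin (x, ([] : List Char)) = x := by
  rw [pvFin, if_neg (by simp)]

theorem tok_spaces : ∀ (a : Nat), 1 ≤ a → ∀ st (t : List Char),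
    List.foldl pvTokStep st (List.replicate a ' ' ++ t) =
    List.foldl pvTokStep (pvFin st, []) t := by
  intro a
  induction a with
  | zero => omega
  | succ m ih =>
      intro _ st t
      rw [List.replicate_succ, List.cons_append, List.foldl_cons, tokStep_space]
      rcases Nat.eq_zero_or_pos m with hm | hm
      · subst hm; simp
      · rw [ih hm _ t, pvFin_pair]

theorem tok_word : ∀ (w : List Char), (∀ c ∈ w, c ≠ ' ') → ∀ st (t : List Char),
    List.foldl pvTokStep st (w ++ t) = List.foldl pvTokStep (st.1, st.2 ++ w) t := by
  intro w
  induction w with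
  | nil => intro _ st t; simp
  | cons c w' ih =>
      intro hw st t
      rw [List.cons_append, List.foldl_cons]
      rw [show pvTokStep st c = (st.1, st.2 ++ [c]) from by
        rw [pvTokStep, if_pos (by simpa using hw c (by simp))]]
      rw [ih (fun d hd => hw d (by simp [hd])) _ t]
      simp

theorem tok_rest : ∀ r : pvRS, pvWOK r = true → pvGapsR r = true → ∀ st,
    pvFin (List.foldl pvTokStep st (pvRender r)) = pvFin st ++ pvWords r := by
  intro r
  induction r with
  | tl a =>
      intro _ _ st
      rw [pvRender, pvWords]
      rcases Nat.eq_zero_or_pos a with ha | ha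
      · subst ha; simp
      · rw [show List.replicate a ' ' = List.replicate a ' ' ++ [] from by simp,
            tok_spaces a ha st []]
        simp [pvFin_pair]
  | wd a w r' ih =>
      intro hw hg st
      obtain ⟨hw1, hw2, hw3⟩ := wok_parts hw
      simp only [pvGapsR, Bool.and_eq_true, decide_eq_true_eq] at hg
      obtain ⟨ha, hg'⟩ := hg
      rw [pvRender, pvWords]
      rw [List.append_assoc, tok_spaces a ha st _]
      rw [tok_word w hw2 _ _]
      have : ((pvFin st, ([] : List Char)).1, (pvFin st, ([] : List Char)).2 ++ w) = (pvFin st, w) := by simp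
      rw [this]
      cases r' with
      | tl b =>
          rw [show pvWords (pvRS.tl b) = [] from rfl]
          rw [show pvRender (pvRS.tl b) = List.replicate b ' ' from rfl]
          rcases Nat.eq_zero_or_pos b with hb | hb
          · subst hb
            simp [pvFin, hw1]
          · rw [show List.replicate b ' ' = List.replicate b ' ' ++ [] from by simp,
                tok_spaces b hb _ []]
            simp [pvFin_pair, pvFin, hw1]
      | wd b w' r'' =>
          rw [ih hw3 hg' (pvFin st, w)]
          rw [show pvFin (pvFin st, w) = pvFin st ++ [w] from by simp [pvFin, hw1]]
          simp

theorem tok_main : ∀ rs : pvRS, pvWOK rs = true → pvGapsOK rs = true →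
    pvFin (List.foldl pvTokStep ([], []) (pvRender rs)) = pvWords rs := by
  intro rs hw hg
  cases rs with
  | tl a =>
      have : pvGapsR (pvRS.tl a) = true := rfl
      simpa [pvFin_pair] using tok_rest (pvRS.tl a) hw this ([], [])
  | wd a w r =>
      obtain ⟨hw1, hw2, hw3⟩ := wok_parts hw
      rw [pvRender, pvWords]
      rw [List.append_assoc]
      have hstep : List.foldl pvTokStep ([], []) (List.replicate a ' ' ++ (w ++ pvRender r)) =
          List.foldl pvTokStep ([], []) (w ++ pvRender r) := by
        rcases Nat.eq_zero_or_pos a with ha | ha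
        · subst ha; simp
        · rw [tok_spaces a ha _ _, pvFin_pair]
      rw [hstep, tok_word w hw2 _ _]
      have hg' : pvGapsR r = true := by simpa [pvGapsOK] using hg
      rw [show (((([] : List (List Char)), ([] : List Char))).1, (([] : List (List Char)), ([] : List Char)).2 ++ w) = (([] : List (List Char)), w) from by simp]
      rw [tok_rest r hw3 hg' _]
      rw [show pvFin (([] : List (List Char)), w) = [w] from by simp [pvFin, hw1]]
      simp

-- ===== suffix/prefix positioning helpers =====
theorem prefix_of_prefix_append {q a b : List Char} (h : q <+: a ++ b) (hl : q.length ≤ a.length) :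
    q <+: a := by
  have h1 : q = (a ++ b).take q.length := List.prefix_iff_eq_take.mp h
  rw [List.take_append] at h1
  rw [show q.length - a.length = 0 from by omega] at h1
  simp at h1
  rw [h1]
  exact List.take_prefix _ _

theorem suffix_append_right {p x y : List Char} (h : p <:+ x ++ y) (hl : p.length ≤ y.length) :
    p <:+ y := by
  rw [← List.reverse_prefix] at h ⊢
  rw [List.reverse_append] at h
  exact prefix_of_prefix_append h (by simpa using hl)

theorem suffix_extend {p y : List Char} (x : List Char) (h : p <:+ y) : p <:+ x ++ y :=
  h.trans (List.suffix_append _ _)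

theorem render_ends_space : ∀ rs : pvRS, 1 ≤ pvTailGap rs → [' '] <:+ pvRender rs := by
  intro rs
  induction rs with
  | tl a =>
      intro h
      rw [pvRender, pvTailGap] at *
      rw [show a = (a - 1) + 1 from by omega, List.replicate_succ']
      exact List.suffix_append _ _
  | wd a w r ih =>
      intro h
      rw [pvRender]
      exact suffix_extend _ (ih h)

theorem prefix_replicate_space {c : Char} {t u : List Char} (b : Nat) (hb : 1 ≤ b)
    (h : (c :: t) <+: List.replicate b ' ' ++ u) : c = ' ' := by
  rw [show b = (b - 1) + 1 from by omega, List.replicate_succ, List.cons_append,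
     List.cons_prefix_cons] at h
  exact h.1

theorem ends_starQ : ∀ rs : pvRS, pvWOK rs = true → pvGapsOK rs = true → pvTailGap rs = 0 →
    ['*', '?'] <:+ pvRender rs →
    ∃ w, (pvWords rs).getLast? = some w ∧ ['*', '?'] <:+ w := by
  intro rs
  induction rs with
  | tl a =>
      intro _ _ ht h
      rw [pvTailGap] at ht
      subst ht
      rw [pvRender] at h
      simp [List.suffix_nil] at h
  | wd a w r ih =>
      intro hw hg ht h
      obtain ⟨hw1, hw2, hw3⟩ := wok_parts hw
      rw [pvRender] at h
      cases r with
      | tl b =>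
          have hb : b = 0 := by simpa [pvTailGap] using ht
          subst hb
          rw [show pvRender (pvRS.tl 0) = [] from rfl, List.append_nil] at h
          refine ⟨w, by simp [pvWords], ?_⟩
          rcases Nat.lt_or_ge w.length 2 with hlen | hlen
          · exfalso
            match w, hw1, hlen with
            | [w0], _, _ =>
                rw [← List.reverse_prefix] at h
                rw [List.reverse_append] at h
                rw [show ([w0] : List Char).reverse = [w0] from rfl] at h
                rw [show (['*', '?'] : List Char).reverse = ['?', '*'] from rfl] at h
                rw [show ([w0] : List Char) ++ (List.replicate a ' ').reverse = w0 :: (List.replicate a ' ').reverse from rfl] at h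
                rw [List.cons_prefix_cons] at h
                have h2 := h.2
                rw [List.reverse_replicate] at h2
                match a, h2 with
                | 0, h2 => simp at h2
                | a+1, h2 =>
                    rw [List.replicate_succ, List.cons_prefix_cons] at h2
                    exact absurd h2.1 (by decide)
          · exact suffix_append_right h (by simp; omega)
      | wd b w' r' =>
          have hgR : pvGapsR (pvRS.wd b w' r') = true := by simpa [pvGapsOK] using hg
          simp only [pvGapsR, Bool.and_eq_true, decide_eq_true_eq] at hgR
          obtain ⟨hb1, hg'⟩ := hgR
          have hw' := wok_parts hw3
          have hlen : 2 ≤ (pvRender (pvRS.wd b w' r')).length := by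
            rw [pvRender]
            simp
            have : 1 ≤ w'.length := List.length_pos_of_ne_nil hw'.1
            omega
          have h2 : ['*', '?'] <:+ pvRender (pvRS.wd b w' r') := by
            rw [List.append_assoc] at h
            exact suffix_append_right (suffix_append_right h (by simp; omega)) hlen
          have ht' : pvTailGap (pvRS.wd b w' r') = 0 := by simpa [pvTailGap] using ht
          have hgOK : pvGapsOK (pvRS.wd b w' r') = true := by
            simpa [pvGapsOK] using hg'
          obtain ⟨wl, hwl1, hwl2⟩ := ih hw3 hgOK ht' h2
          refine ⟨wl, ?_, hwl2⟩
          rw [show pvWords (pvRS.wd a w (pvRS.wd b w' r')) = w :: w' :: pvWords r' from rfl]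
          rw [List.getLast?_cons_cons]
          rw [show (w' :: pvWords r') = pvWords (pvRS.wd b w' r') from rfl]
          exact hwl1

theorem starts_cond : ∀ rs : pvRS, pvWOK rs = true → pvGapsOK rs = true →
    ['?', '*', ' '] <+: pvRender (pvSet0T rs) →
    pvHeadGap rs = 0 ∧ (pvWords rs).head? = some ['?', '*'] ∧ 2 ≤ (pvWords rs).length := by
  intro rs hw hg h
  cases rs with
  | tl a =>
      rw [show pvRender (pvSet0T (pvRS.tl a)) = [] from rfl] at h
      simp [List.prefix_nil] at h
  | wd a w r =>
      obtain ⟨hw1, hw2, hw3⟩ := wok_parts hw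
      rw [show pvSet0T (pvRS.wd a w r) = .wd a w (pvSet0T r) from rfl, pvRender] at h
      rcases Nat.eq_zero_or_pos a with ha | ha
      · subst ha
        rw [show List.replicate 0 ' ' = ([] : List Char) from rfl, List.nil_append] at h
        match w, hw1, hw2, h with
        | [c1], _, _, h =>
            exfalso
            rw [show ([c1] : List Char) ++ pvRender (pvSet0T r) = c1 :: pvRender (pvSet0T r) from rfl,
               List.cons_prefix_cons] at h
            obtain ⟨hc1, h⟩ := h
            cases r with
            | tl b => simp [pvSet0T, pvRender, List.prefix_nil] at h
            | wd b w' r' =>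
                have hgR : pvGapsR (pvRS.wd b w' r') = true := by simpa [pvGapsOK] using hg
                simp only [pvGapsR, Bool.and_eq_true, decide_eq_true_eq] at hgR
                rw [show pvSet0T (pvRS.wd b w' r') = .wd b w' (pvSet0T r') from rfl, pvRender,
                   List.append_assoc] at h
                exact absurd (prefix_replicate_space b hgR.1 h) (by decide)
        | [c1, c2], _, _, h =>
            rw [show ([c1, c2] : List Char) ++ pvRender (pvSet0T r) = c1 :: c2 :: pvRender (pvSet0T r) from rfl,
               List.cons_prefix_cons, List.cons_prefix_cons] at h
            obtain ⟨hc1, hc2, h⟩ := h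
            cases r with
            | tl b => simp [pvSet0T, pvRender, List.prefix_nil] at h
            | wd b w' r' =>
                subst hc1; subst hc2
                refine ⟨rfl, ?_, ?_⟩
                · simp [pvWords]
                · simp [pvWords]
        | c1 :: c2 :: c3 :: w', _, hw2, h =>
            exfalso
            rw [show (c1 :: c2 :: c3 :: w') ++ pvRender (pvSet0T r) = c1 :: c2 :: c3 :: (w' ++ pvRender (pvSet0T r)) from rfl,
               List.cons_prefix_cons, List.cons_prefix_cons, List.cons_prefix_cons] at h
            exact hw2 c3 (by simp) h.2.2.1.symm
      · exfalso
        rw [List.append_assoc] at h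
        exact absurd (prefix_replicate_space a ha h) (by decide)

theorem star3_spaceless : ∀ c ∈ pvStar3, c ≠ ' ' := by
  intro c hc
  simp only [pvStar3, List.mem_cons, List.mem_singleton] at hc
  rcases hc with h | h | h | h <;> first | (subst h; decide) | simp at h

theorem hNL_infix_back (p : List Char) (hne : p ≠ []) (hsp : ∀ c ∈ p, c ≠ ' ') :
    ∀ (n : Nat) (s : List Char), ¬ (p <:+: s) → ¬ (p <:+: hNL n s) := by
  intro n
  induction n with
  | zero => intro s h; exact h
  | succ m ih =>
      intro s h
      rw [hNL]
      exact ih _ (fun hh => h (repS2_infix_back p hne hsp s hh))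

theorem gapsR_ge_one : ∀ r : pvRS, pvGapsR r = true → ∀ x ∈ pvIgapsR r, 1 ≤ x := by
  intro r
  induction r with
  | tl a => intro _ x hx; simp [pvIgapsR] at hx
  | wd a w r' ih =>
      intro h x hx
      simp only [pvGapsR, Bool.and_eq_true, decide_eq_true_eq] at h
      simp only [pvIgapsR, List.mem_cons] at hx
      rcases hx with hx | hx
      · omega
      · exact ih h.2 x hx

theorem all1_of_forall : ∀ r : pvRS, (∀ x ∈ pvIgapsR r, x = 1) → pvAll1R r = true := by
  intro r
  induction r with
  | tl a => intro _; rfl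
  | wd a w r' ih =>
      intro h
      simp only [pvAll1R, Bool.and_eq_true, beq_iff_eq]
      exact ⟨h a (by simp [pvIgapsR]), ih (fun x hx => h x (by simp [pvIgapsR, hx]))⟩

theorem rstrip_prefix (s : List Char) : rstripSp s <+: s := by
  rw [← List.reverse_suffix]
  rw [rstripSp, List.reverse_reverse]
  exact List.dropWhile_suffix _

-- ===== glue: the two ports against the mask / parse view =====
theorem isIn_singleton (c : Char) (l : List Char) : PySem.Chars.isIn [c] l = l.contains c := by
  by_cases hm : c ∈ l
  · rw [List.contains_iff_mem.mpr hm]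
    rw [(PySem.Chars.isIn_iff_infix [c] l).mpr ?_]
    obtain ⟨u, t, hut⟩ := List.append_of_mem hm
    exact ⟨u, t, by rw [hut]; simp⟩
  · have h1 : PySem.Chars.isIn [c] l = false := by
      rw [PySem.Chars.isIn_eq_false_iff]
      intro hinf
      exact hm (hinf.subset (by simp))
    have h2 : l.contains c = false := by
      rw [← Bool.not_eq_true, List.contains_iff_mem]
      exact hm
    rw [h1, h2]

theorem pvKeep_eq (also : String) (c : Char) :
    pvKeep also c = ((pvBaseChars ++ also.toList).contains c && (c != ' ')) := rfl

theorem mask_char_eq (also : String) (c : Char) :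
    (if (pvBaseChars ++ also.toList).contains c then c else ' ') =
    (if pvKeep also c then c else ' ') := by
  by_cases hc : c = ' '
  · subst hc
    have h1 : (if (pvBaseChars ++ also.toList).contains ' ' then ' ' else ' ') = ' ' := by
      split_ifs <;> rfl
    rw [h1, if_neg (by rw [pvKeep_eq]; simp)]
  · rw [pvKeep_eq]
    have h2 : (c != ' ') = true := by simpa using hc
    rw [h2, Bool.and_true]

theorem pvMaskA_eq (data also : String) : pvMaskA data also = pvMask data also := by
  unfold pvMaskA pvMask
  exact congrArg (fun f => data.toList.map f) (funext (mask_char_eq also))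

theorem altStep_eq (also : String) (st : List (List Char) × List Char) (c : Char) :
    pvAltStep (pvBaseChars ++ also.toList) st c = pvTokStep st (if pvKeep also c then c else ' ') := by
  have hcond : (PySem.Chars.isIn [c] (pvBaseChars ++ also.toList) && (c != ' ')) = pvKeep also c := by
    rw [isIn_singleton, pvKeep_eq]
  by_cases hk : pvKeep also c = true
  · have hc : c ≠ ' ' := by
      intro h; subst h; rw [pvKeep_eq] at hk; simp at hk
    rw [if_pos hk]
    rw [pvAltStep, if_pos (by rw [hcond]; exact hk)]
    rw [pvTokStep, if_pos hc]
  · rw [if_neg hk]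
    rw [pvAltStep, if_neg (by rw [hcond]; exact hk)]
    rw [show pvTokStep st ' ' = if st.2 ≠ [] then (st.1 ++ [st.2], []) else (st.1, []) from by
      rw [pvTokStep, if_neg (by simp)]]

theorem alt_eq_words (data also : String) :
    stripNonAlphaNumaric_alt data also =
    String.ofList (PySem.Chars.join [' '] (pvWords (pvParse (pvMask data also)))) := by
  simp only [stripNonAlphaNumaric_alt]
  have h1 : data.toList.foldl (pvAltStep (pvBaseChars ++ also.toList)) ([], []) =
      List.foldl pvTokStep ([], []) (pvMask data also) := by
    rw [show pvMask data also = data.toList.map (fun c => if pvKeep also c then c else ' ') from rfl]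
    rw [List.foldl_map]
    rw [show (fun (x : List (List Char) × List Char) (y : Char) =>
          pvTokStep x (if pvKeep also y then y else ' '))
        = (fun st c => pvAltStep (pvBaseChars ++ also.toList) st c) from
          funext₂ (fun st c => (altStep_eq also st c).symm)]
  rw [h1]
  have h2 := tok_main (pvParse (pvMask data also)) (parse_wok _) (parse_gaps _)
  rw [render_parse] at h2
  rw [show (if (List.foldl pvTokStep ([], []) (pvMask data also)).2 ≠ []
        then (List.foldl pvTokStep ([], []) (pvMask data also)).1 ++ [(List.foldl pvTokStep ([], []) (pvMask data also)).2]
        else (List.foldl pvTokStep ([], []) (pvMask data also)).1)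
      = pvFin (List.foldl pvTokStep ([], []) (pvMask data also)) from rfl]
  rw [h2]

theorem igaps_ge_one (rs : pvRS) (hg : pvGapsOK rs = true) : ∀ y ∈ pvIgaps rs, 1 ≤ y := by
  cases rs with
  | tl a => intro y hy; simp [pvIgaps] at hy
  | wd a w r => exact gapsR_ge_one r (by simpa [pvGapsOK] using hg)

theorem infix_extend_left {p y : List Char} (x : List Char) (h : p <:+: y) : p <:+: x ++ y :=
  h.trans (List.suffix_append x y).isInfix

theorem last_word_suffix : ∀ rs : pvRS, pvTailGap rs = 0 →
    ∀ w, (pvWords rs).getLast? = some w → ∀ p, p <:+ w → p <:+ pvRender rs := by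
  intro rs
  induction rs with
  | tl a => intro _ w hw; simp [pvWords] at hw
  | wd a w0 r ih =>
      intro ht w hw p hp
      cases r with
      | tl b =>
          have hb : b = 0 := by simpa [pvTailGap] using ht
          subst hb
          have hww : w0 = w := by simpa [pvWords] using hw
          subst hww
          rw [pvRender, show pvRender (pvRS.tl 0) = [] from rfl, List.append_nil]
          exact hp.trans (List.suffix_append _ _)
      | wd b w' r' =>
          have ht' : pvTailGap (pvRS.wd b w' r') = 0 := by simpa [pvTailGap] using ht
          have hw' : (pvWords (pvRS.wd b w' r')).getLast? = some w := by
            rw [show pvWords (pvRS.wd a w0 (pvRS.wd b w' r')) = w0 :: w' :: pvWords r' from rfl,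
               List.getLast?_cons_cons] at hw
            exact hw
          have := ih ht' w hw' p hp
          rw [pvRender]
          exact this.trans (List.suffix_append _ _)

theorem first_words_prefix : ∀ rs : pvRS, pvWOK rs = true → pvGapsOK rs = true →
    pvHeadGap rs = 0 → (pvWords rs).head? = some ['?', '*'] → 2 ≤ (pvWords rs).length →
    (['?', '*', ' '] <+: pvRender rs) ∧ ∃ c ∈ (pvRender rs).drop 3, c ≠ ' ' := by
  intro rs hwok hgap h0 hh hlen
  cases rs with
  | tl a => simp [pvWords] at hh
  | wd a w r =>
      have ha : a = 0 := by simpa [pvHeadGap] using h0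
      subst ha
      have hww : w = ['?', '*'] := by simpa [pvWords] using hh
      subst hww
      cases r with
      | tl b => simp [pvWords] at hlen
      | wd b w' r' =>
          have hb : 1 ≤ b := by
            have := hgap
            simp only [pvGapsOK, pvGapsR, Bool.and_eq_true, decide_eq_true_eq] at this
            exact this.1
          obtain ⟨hw1, hw2, -⟩ := wok_parts (wok_parts hwok).2.2
          obtain ⟨c0, wt, hct⟩ : ∃ c0 wt, w' = c0 :: wt := by
            cases w' with
            | nil => exact absurd rfl hw1
            | cons c0 wt => exact ⟨c0, wt, rfl⟩
          have hrend : pvRender (pvRS.wd 0 ['?', '*'] (pvRS.wd b w' r')) =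
              '?' :: '*' :: ' ' :: (List.replicate (b - 1) ' ' ++ (w' ++ pvRender r')) := by
            rw [pvRender, pvRender]
            rw [show List.replicate 0 ' ' = ([] : List Char) from rfl, List.nil_append]
            rw [show b = (b - 1) + 1 from by omega, List.replicate_succ]
            simp
          rw [hrend]
          constructor
          · rw [List.cons_prefix_cons]
            refine ⟨rfl, ?_⟩
            rw [List.cons_prefix_cons]
            refine ⟨rfl, ?_⟩
            rw [List.cons_prefix_cons]
            exact ⟨rfl, List.nil_prefix⟩
          · refine ⟨c0, ?_, hw2 c0 (by simp [hct])⟩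
            simp [hct]

theorem igapsR_to_infix : ∀ r : pvRS, ∀ y ∈ pvIgapsR r, 2049 ≤ y →
    List.replicate 2049 ' ' <:+: pvRender (pvSet0T r) := by
  intro r
  induction r with
  | tl a => intro y hy; simp [pvIgapsR] at hy
  | wd b w' r' ih =>
      intro y hy hge
      simp only [pvIgapsR, List.mem_cons] at hy
      rw [show pvSet0T (pvRS.wd b w' r') = .wd b w' (pvSet0T r') from rfl, pvRender]
      rcases hy with hy | hy
      · subst hy
        rw [List.append_assoc]
        refine List.IsPrefix.isInfix (List.IsPrefix.trans ?_ (List.prefix_append _ _))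
        rw [show (2049 : Nat) = min 2049 y from by omega, ← List.take_replicate]
        exact List.take_prefix _ _
      · rw [List.append_assoc]
        exact infix_extend_left _ (infix_extend_left _ (ih y hy hge))

theorem igaps_to_infix : ∀ rs : pvRS, ∀ y ∈ pvIgaps rs, 2049 ≤ y →
    List.replicate 2049 ' ' <:+: pvRender (pvSet0T rs) := by
  intro rs y hy hge
  cases rs with
  | tl a => simp [pvIgaps] at hy
  | wd a w r =>
      rw [show pvSet0T (pvRS.wd a w r) = .wd a w (pvSet0T r) from rfl, pvRender]
      rw [List.append_assoc]
      exact infix_extend_left _ (infix_extend_left _ (igapsR_to_infix r y hy hge))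

-- ===== bridging D_'s body to the named proof helpers =====
theorem D_iff (data also : String) :
    D_stripNonAlphaNumaric data also ↔
      pvTmp <:+: pvMask data also ∨ pvStar3 <:+: pvMask data also ∨
      ['*', '?'] <:+ pvMask data also ∨
      (['?', '*', ' '] <+: pvMask data also ∧ rstripSp (pvMask data also) ≠ ['?', '*']) ∨
      List.replicate 2049 ' ' <:+: rstripSp (pvMask data also) := by
  unfold D_stripNonAlphaNumaric
  simp only []
  rw [pvMaskA_eq data also]
  simp only [Bool.or_eq_true, Bool.and_eq_true, PySem.Chars.isIn_iff_infix,
    List.isPrefixOf_iff_prefix, List.isSuffixOf_iff_suffix, bne_iff_ne, or_assoc]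
  rfl
theorem rstrip_decomp (s : List Char) : ∃ k, s = rstripSp s ++ List.replicate k ' ' := by
  refine ⟨(s.reverse.takeWhile (fun c => c == ' ')).length, ?_⟩
  have hrep : (s.reverse.takeWhile (fun c => c == ' ')).reverse
      = List.replicate (s.reverse.takeWhile (fun c => c == ' ')).length ' ' := by
    rw [← List.reverse_replicate]
    congr 1
    apply List.eq_replicate_of_mem
    intro b hb
    simpa using List.mem_takeWhile_imp hb
  conv_lhs => rw [← s.reverse_reverse,
    ← List.takeWhile_append_dropWhile (p := fun c => c == ' ') (l := s.reverse),
    List.reverse_append]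
  rw [rstripSp, hrep]

theorem trim_ne_of_word (m : List Char) (hp : ['?', '*', ' '] <+: m)
    (hc : ∃ c ∈ m.drop 3, c ≠ ' ') : rstripSp m ≠ ['?', '*'] := by
  obtain ⟨c, hcm, hcne⟩ := hc
  obtain ⟨r, hr⟩ := hp
  subst hr
  intro he
  obtain ⟨k, hk⟩ := rstrip_decomp (['?', '*', ' '] ++ r)
  rw [he] at hk
  have hk' : ' ' :: r = List.replicate k ' ' := by simpa using hk
  match k, hk' with
  | 0, hk' => simp [List.replicate] at hk'
  | k+1, hk' =>
      rw [List.replicate_succ] at hk'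
      have hr2 : r = List.replicate k ' ' := by simpa using hk'
      rw [show (['?', '*', ' '] ++ r).drop 3 = r from by simp] at hcm
      rw [hr2] at hcm
      exact hcne (List.eq_of_mem_replicate hcm)

set_option maxHeartbeats 2000000 in
theorem strip_main (data also : String) (hD : ¬ D_stripNonAlphaNumaric data also) :
    stripNonAlphaNumaric data also = stripNonAlphaNumaric_alt data also := by
  rw [D_iff] at hD
  simp only [not_or] at hD
  obtain ⟨hb1, hb2, hb3, hb4, hb5⟩ := hD
  -- abbreviations
  have hwok := parse_wok (pvMask data also)
  have hgap := parse_gaps (pvMask data also)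
  have hwok11 : pvWOK (pvHN 11 (pvParse (pvMask data also))) = true := by
    rw [wok_hN]; exact hwok
  have hgap11 : pvGapsOK (pvHN 11 (pvParse (pvMask data also))) = true := gapsOK_hN _ _ hgap
  have hwords : pvWords (pvHN 11 (pvParse (pvMask data also))) = pvWords (pvParse (pvMask data also)) :=
    words_hN _ _
  have hh : hNL 11 (pvMask data also) = pvRender (pvHN 11 (pvParse (pvMask data also))) := by
    conv_lhs => rw [show pvMask data also = pvRender (pvParse (pvMask data also)) from (render_parse _).symm]
    exact hNL_render 11 _ hwok
  have hIh : ¬ (pvStar3 <:+: pvRender (pvHN 11 (pvParse (pvMask data also)))) := by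
    rw [← hh]
    exact hNL_infix_back pvStar3 (by simp [pvStar3]) star3_spaceless 11 _ hb2
  -- end condition for cleanEnd
  have hcondE : ([' '] <:+ pvRender (pvHN 11 (pvParse (pvMask data also)))) ∨
      ¬ (['*', '?'] <:+ pvRender (pvHN 11 (pvParse (pvMask data also)))) := by
    rcases Nat.eq_zero_or_pos (pvTailGap (pvParse (pvMask data also))) with ht0 | htpos
    · right
      intro hsfx
      have ht11 : pvTailGap (pvHN 11 (pvParse (pvMask data also))) = 0 := by
        rw [tailGap_hN, ht0, pvGI_zero]
      obtain ⟨w, hw1, hw2⟩ := ends_starQ _ hwok11 hgap11 ht11 hsfx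
      rw [hwords] at hw1
      have hsfxg := last_word_suffix (pvParse (pvMask data also)) ht0 w hw1 _ hw2
      rw [render_parse] at hsfxg
      exact hb3 hsfxg
    · left
      apply render_ends_space
      rw [tailGap_hN]
      exact pvGI_pos 11 _ htpos
  -- the A pipeline
  simp only [stripNonAlphaNumaric, pvCleanBE]
  rw [pvMaskA_eq data also]
  rw [replaceDuplicate_eq _ hb1]
  rw [hh]
  rw [cleanEnd_eq _ _ (by omega) hIh hcondE]
  rw [set0T_render _ hwok11]
  have hIx : ¬ (pvStar3 <:+: pvRender (pvSet0T (pvHN 11 (pvParse (pvMask data also))))) := by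
    rw [← set0T_render _ hwok11]
    exact fun hhh => hIh (hhh.trans (rstrip_prefix _).isInfix)
  have hcondF : ([' '] <+: pvRender (pvSet0T (pvHN 11 (pvParse (pvMask data also))))) ∨
      ¬ (['?', '*', ' '] <+: pvRender (pvSet0T (pvHN 11 (pvParse (pvMask data also))))) := by
    right
    intro hpre
    obtain ⟨hhg, hw1, hw2⟩ := starts_cond _ hwok11 hgap11 hpre
    rw [hwords] at hw1 hw2
    have h0 : pvHeadGap (pvParse (pvMask data also)) = 0 := by
      rw [headGap_hN] at hhg
      rcases Nat.eq_zero_or_pos (pvHeadGap (pvParse (pvMask data also))) with h0 | hpos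
      · exact h0
      · exact absurd hhg (by have := pvGI_pos 11 _ hpos; omega)
    have hfw := first_words_prefix _ hwok hgap h0 hw1 hw2
    rw [render_parse] at hfw
    exact hb4 ⟨hfw.1, trim_ne_of_word _ hfw.1 hfw.2⟩
  rw [cleanFirst_eq _ _ (by omega) hIx hcondF]
  rw [set0H_render _ (by rw [wok_set0T]; exact hwok11)]
  -- collapse: all internal gaps are 1 after 11 halvings
  have hall1 : (match pvHN 11 (pvParse (pvMask data also)) with
      | pvRS.tl _ => True
      | pvRS.wd _ _ r => pvAll1R r = true) := by
    cases hrs : pvHN 11 (pvParse (pvMask data also)) with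
    | tl a => trivial
    | wd a w r =>
        apply all1_of_forall
        intro x hx
        have hxi : x ∈ pvIgaps (pvHN 11 (pvParse (pvMask data also))) := by
          rw [hrs]; exact hx
        rw [igaps_hN] at hxi
        obtain ⟨y, hy, hxy⟩ := List.mem_map.mp hxi
        have hy1 : 1 ≤ y := igaps_ge_one _ hgap y hy
        have hy2 : y ≤ 2048 := by
          by_contra hcon
          apply hb5
          have hinf := igaps_to_infix _ y hy (by omega)
          rw [show rstripSp (pvMask data also) = pvRender (pvSet0T (pvParse (pvMask data also))) from by
            conv_lhs => rw [show pvMask data also = pvRender (pvParse (pvMask data also)) from (render_parse _).symm]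
            exact set0T_render _ hwok]
          exact hinf
        rw [← hxy]
        exact pvGI_collapse 11 y hy1 (by norm_num; omega)
  rw [trim_render_eq_join _ hall1]
  rw [hwords]
  rw [alt_eq_words data also, jn_eq_join]

-- ===== VERDICT (by name: the statement is the Claim_ definition above) =====
theorem stripNonAlphaNumaric_spec : Claim_unchanged_stripNonAlphaNumaric := by
  intro data also _
  intro hD
  exact strip_main data also hD

theorem stripNonAlphaNumaric_changed : Claim_changed_stripNonAlphaNumaric := by
  unfold Claim_changed_stripNonAlphaNumaric; decide
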